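-- pv_equiv track=rewrite | github.com/manas-17045/LeetcodeSolutions | Leetcode 2401-2500/2440/2440_2.py | componentValue
-- ===== SOURCE A (Python) =====
-- def componentValue(nums: list[int], edges: list[list[int]]) -> int:
--     """
--     Given an integer array nums of size n and a 2D integer array edges of size n - 1 where
--     edges[i] = [ui, vi] represents a bidirectional edge between nodes ui and vi. The given
--     edges form a tree.
--
--     You are allowed to remove some edges, splitting the tree into multiple connected
--     components. If you remove m edges, you will get m + 1 components.
--
--     Return the maximum number of edges you can remove such that the sum of values of nums
--     of all nodes in each component is equal.
--
--     Args:
--         nums: An integer array of node values.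
--         edges: A 2D integer array representing the tree edges.
--
--     Returns:
--         The maximum number of edges that can be removed.
--     """
--     n = len(nums)
--     if n == 1:
--         return 0
--
--     # Build adjacency
--     adj = [[] for _ in range(n)]
--     for u, v in edges:
--         adj[u].append(v)
--         adj[v].append(u)
--
--     # Compute parent[] and a post-order list of nodes
--     parent = [-1] * n
--     order = []
--     stack = [0]
--     parent[0] = 0   # Mark root's parent as itself
--     while stack:
--         u = stack.pop()
--         order.append(u)
--         for w in adj[u]:
--             if w == parent[u]:
--                 continue
--             parent[w] = u
--             stack.append(w)
--     order.reverse() # Now 'oder' is a post-order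
--
--     total = sum(nums)
--     mx = max(nums)
--
--     # Enumerate all divisors of total, filter by >= mx, sort ascending
--     divs = []
--     i = 1
--     while i * i <= total:
--         if total % i == 0:
--             if i >= mx:
--                 divs.append(i)
--             j = total // i
--             if j != i and j >= mx:
--                 divs.append(j)
--         i += 1
--     divs.sort()
--
--     # For each candidate target sum, try to peel off subtrees of sum == target
--     for target in divs:
--         needed = total //target
--         subSum = nums[:]
--         count = 0
--         ok = True
--         for u in order:
--             if subSum[u] == target:
--                 count += 1
--             else:
--                 p = parent[u]
--                 if p == u:
--                     # Root did not match and cannot pass up => fail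
--                     ok = False
--                     break
--                 subSum[p] += subSum[u]
--
--             # Early exit if too many
--             if count > needed:
--                 ok = False
--                 break
--
--         if ok and count == needed:
--             return needed - 1
--
--     return 0
-- ===== SOURCE B (Python) =====
-- def componentValue(nums: list[int], edges: list[list[int]]) -> int:
--     n = len(nums)
--     if n == 1:
--         return 0
--
--     # Build adjacency
--     adj = [[] for _ in range(n)]
--     for u, v in edges:
--         adj[u].append(v)
--         adj[v].append(u)
--
--     # Level-synchronised BFS from the root: parent pointers plus the list of levels.
--     levels = [[0]]
--     seen = [False] * n
--     seen[0] = True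
--     parent = [0] * n
--     while levels[-1]:
--         nxt = []
--         for u in levels[-1]:
--             for w in adj[u]:
--                 if not seen[w]:
--                     seen[w] = True
--                     parent[w] = u
--                     nxt.append(w)
--         levels.append(nxt)
--     # Deepest level first: every node comes before its parent.
--     order = [u for lvl in reversed(levels) for u in lvl]
--
--     total = sum(nums)
--     mx = max(nums)
--
--     # Enumerate all divisors of total, filter by >= mx, sort ascending
--     divs = []
--     i = 1
--     while i * i <= total:
--         if total % i == 0:
--             if i >= mx:
--                 divs.append(i)
--             j = total // i
--             if j != i and j >= mx:
--                 divs.append(j)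
--         i += 1
--     divs.sort()
--
--     # For each candidate target, fold every non-root subtree upward, then check the root.
--     for target in divs:
--         needed = total // target
--         subSum = nums[:]
--         count = 0
--         for u in order:
--             if u == 0:
--                 continue
--             if subSum[u] == target:
--                 count += 1
--             else:
--                 subSum[parent[u]] += subSum[u]
--         if subSum[0] == target and count + 1 == needed:
--             return needed - 1
--
--     return 0
-- ===== Notes on version B (the rewrite author's own statement) =====
-- stated objective: alternative
-- what changed: The iterative stack DFS with in-loop parent checks and the flag/early-break peel loop are replaced by a level-synchronised BFS with a seen array (order = levels deepest-first instead of a reversed DFS pop sequence) and a break-free peel that skips the root in the loop and checks it once afterwards.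
-- outside the precondition, e.g. on componentValue([1, 1], [[-1, 0], [1, 0]]): A returns 0, B returns 1; on componentValue([1, 1], []): A returns 0, B returns 0
import Mathlib
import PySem

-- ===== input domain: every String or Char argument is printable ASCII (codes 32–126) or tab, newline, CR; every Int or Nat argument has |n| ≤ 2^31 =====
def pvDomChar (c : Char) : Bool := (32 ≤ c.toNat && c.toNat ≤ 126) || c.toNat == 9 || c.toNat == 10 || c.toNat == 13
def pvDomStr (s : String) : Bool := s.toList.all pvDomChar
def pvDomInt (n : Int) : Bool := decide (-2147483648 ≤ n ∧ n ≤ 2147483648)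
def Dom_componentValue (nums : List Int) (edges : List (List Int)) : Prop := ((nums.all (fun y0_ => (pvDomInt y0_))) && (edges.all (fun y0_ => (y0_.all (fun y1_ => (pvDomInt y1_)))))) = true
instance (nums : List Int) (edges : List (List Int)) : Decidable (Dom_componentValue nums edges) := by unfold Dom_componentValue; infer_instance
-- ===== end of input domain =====

-- B restructures A: a level-synchronised BFS with a seen array replaces the stack DFS
-- (order = levels deepest-first instead of a reversed pop sequence), and the per-target
-- peel loop drops the ok-flag/early breaks, skips the root and checks it once after the
-- loop.  Same return value on every input admitted by Pre_ (see below); cost unchanged.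

-- ===== PORT A =====

-- shared helper: adjacency building ('for u, v in edges: adj[u].append(v); adj[v].append(u)')
-- identical code in Source A and Source B, the array is modelled as a function Int → List Int
def pvAdj (edges : List (List Int)) : Int → List Int :=
  edges.foldl (fun adj e =>
    match e with
    | [u, v] =>
        let a1 : Int → List Int := Function.update adj u (adj u ++ [v])
        Function.update a1 v (a1 v ++ [u])
    | _ => adj) (fun _ => [])

-- shared helper: divisor enumeration, identical code in Source A and Source B
-- ('while i*i <= total: …'; fuel total.toNat+2 dominates the number of iterations)
def pvDivsLoop : Nat → Int → Int → Int → List Int → List Int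
  | 0, _, _, _, acc => acc
  | f+1, i, total, mx, acc =>
    if i * i ≤ total then
      let acc :=
        if PySem.Int.mod total i = 0 then
          let acc := if mx ≤ i then acc ++ [i] else acc
          let j := PySem.Int.floordiv total i
          if j ≠ i ∧ mx ≤ j then acc ++ [j] else acc
        else acc
      pvDivsLoop f (i+1) total mx acc
    else acc

def pvDivs (total mx : Int) : List Int :=
  PySem.List.sorted (pvDivsLoop (total.toNat + 2) 1 total mx []) (fun x => x) false

-- A: parent = [-1]*n; parent[0] = 0
def pvInitParent : Int → Int := fun v => if v = 0 then 0 else -1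

-- A: 'for w in adj[u]: if w == parent[u]: continue; parent[w] = u; stack.append(w)'
-- (stack is held head = top, so append = cons)
def pvDfsPush (adjU : List Int) (u : Int) (parent : Int → Int) (stack : List Int) :
    (Int → Int) × List Int :=
  adjU.foldl (fun pr w =>
    if w = pr.1 u then pr
    else (Function.update pr.1 w u, w :: pr.2)) (parent, stack)

-- A: 'while stack: u = stack.pop(); order.append(u); …'  (fuel n: one pop per node)
def pvDfsLoop : Nat → List Int → (Int → List Int) → (Int → Int) → List Int →
    ((Int → Int) × List Int)
  | 0, _, _, parent, order => (parent, order)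
  | f+1, stack, adj, parent, order =>
    match stack with
    | [] => (parent, order)
    | u :: rest =>
      let pr := pvDfsPush (adj u) u parent rest
      pvDfsLoop f pr.2 adj pr.1 (order ++ [u])

-- A's per-target loop, with the ok-flag early exits
def pvPeelA : List Int → (Int → Int) → Int → Int → (Int → Int) → Int → Bool
  | [], _, _, needed, _, count => decide (count = needed)
  | u :: os, parent, t, needed, subSum, count =>
    if subSum u = t then
      if count + 1 > needed then false
      else pvPeelA os parent t needed subSum (count + 1)
    else
      let p := parent u
      if p = u then false
      else
        let subSum' := Function.update subSum p (subSum p + subSum u)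
        if count > needed then false
        else pvPeelA os parent t needed subSum' count

-- A: 'for target in divs: … return needed - 1' / fall through to 'return 0'
def pvGoA : List Int → List Int → (Int → Int) → Int → (Int → Int) → Int
  | [], _, _, _, _ => 0
  | t :: ts, order, parent, total, nums0 =>
    let needed := PySem.Int.floordiv total t
    if pvPeelA order parent t needed nums0 0 then needed - 1
    else pvGoA ts order parent total nums0

def componentValue (nums : List Int) (edges : List (List Int)) : Int :=
  let n := nums.length
  if n = 1 then 0
  else
    let adj := pvAdj edges
    let pr := pvDfsLoop n [0] adj pvInitParent []
    let total := nums.sum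
    let mx := (PySem.List.max? nums (fun x => x)).getD 0
    pvGoA (pvDivs total mx) pr.2.reverse pr.1 total
      (fun v => (PySem.List.pyGet? nums v).getD 0)

-- ===== PORT B =====

-- B: one BFS sweep over the current level ('for u in levels[-1]: for w in adj[u]: if not seen[w]: …')
def pvBfsStep (adj : Int → List Int) (cur : List Int) (seen : Int → Bool) (parent : Int → Int) :
    (Int → Bool) × (Int → Int) × List Int :=
  cur.foldl (fun s u =>
    (adj u).foldl (fun s w =>
      if s.1 w then s
      else (Function.update s.1 w true, Function.update s.2.1 w u, s.2.2 ++ [w])) s) (seen, parent, [])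

-- B: 'while levels[-1]: …'; the levels are returned deepest level first
-- ('order = [u for lvl in reversed(levels) for u in lvl]'); fuel n+1 bounds the level count
def pvBfsLoop : Nat → (Int → List Int) → List Int → (Int → Bool) → (Int → Int) →
    ((Int → Int) × List (List Int))
  | 0, _, _, _, parent => (parent, [])
  | f+1, adj, cur, seen, parent =>
    if cur.isEmpty then (parent, [])
    else
      let s := pvBfsStep adj cur seen parent
      let r := pvBfsLoop f adj s.2.2 s.1 s.2.1
      (r.1, r.2 ++ [cur])

-- B's per-target loop: no flags, no breaks, root skipped
def pvPeelB : List Int → (Int → Int) → Int → (Int → Int) → Int → ((Int → Int) × Int)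
  | [], _, _, subSum, count => (subSum, count)
  | u :: os, parent, t, subSum, count =>
    if u = 0 then pvPeelB os parent t subSum count
    else if subSum u = t then pvPeelB os parent t subSum (count + 1)
    else pvPeelB os parent t
      (Function.update subSum (parent u) (subSum (parent u) + subSum u)) count

-- B: 'if subSum[0] == target and count + 1 == needed: return needed - 1'
def pvGoB : List Int → List Int → (Int → Int) → Int → (Int → Int) → Int
  | [], _, _, _, _ => 0
  | t :: ts, order, parent, total, nums0 =>
    let needed := PySem.Int.floordiv total t
    let r := pvPeelB order parent t nums0 0
    if r.1 0 = t ∧ r.2 + 1 = needed then needed - 1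
    else pvGoB ts order parent total nums0

def componentValue_alt (nums : List Int) (edges : List (List Int)) : Int :=
  let n := nums.length
  if n = 1 then 0
  else
    let adj := pvAdj edges
    let pr := pvBfsLoop (n + 1) adj [0] (fun v => v = 0) (fun _ => 0)
    let total := nums.sum
    let mx := (PySem.List.max? nums (fun x => x)).getD 0
    pvGoB (pvDivs total mx) pr.2.flatten pr.1 total
      (fun v => (PySem.List.pyGet? nums v).getD 0)

-- ===== PRECONDITION & SPEC =====

-- adjacency of the undirected edge list, as a Bool relation
def pvAdjB (edges : List (List Int)) (u v : Int) : Bool :=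
  edges.any (fun e => e = [u, v] || e = [v, u])

-- one step of the standard reachability closure (neighbours of the old set only)
def pvStep (n : Nat) (edges : List (List Int)) (vs : List Int) : List Int :=
  vs ++ ((List.range n).map (Int.ofNat)).filter
    (fun v => !vs.contains v && vs.any (fun u => pvAdjB edges u v))

def pvReach (n : Nat) (edges : List (List Int)) (k : Nat) : List Int :=
  (pvStep n edges)^[k] [0]

-- an edge as an unordered pair
def pvNorm (e : List Int) : Int × Int :=
  match e with
  | [u, v] => (min u v, max u v)
  | _ => (0, 0)

-- 'edges is a tree on the nodes 0..n-1': n-1 pairwise-distinct well-formed edges, connected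
def pvTree (n : Nat) (edges : List (List Int)) : Prop :=
  (∀ e ∈ edges, e.length = 2 ∧ ∀ x ∈ e, 0 ≤ x ∧ x < (n : Int)) ∧
  edges.length + 1 = n ∧
  (edges.map pvNorm).Nodup ∧
  ∀ v : Int, 0 ≤ v → v < (n : Int) → v ∈ pvReach n edges n

-- Pre_ keeps the function's stated contract: edges form a tree on nodes 0..len(nums)-1
-- (plus the unconditional n == 1 shortcut).  Outside it A may raise an IndexError or
-- unpacking error (bad indices or arity), loop forever (a cycle through node 0 makes the
-- stack walk revisit nodes for ever), or silently inspect only node 0's component of a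
-- disconnected forest — an artefact of starting the walk at 0; B does the natural thing there.
def Pre_componentValue (nums : List Int) (edges : List (List Int)) : Prop :=
  nums.length = 1 ∨ pvTree nums.length edges

instance (nums : List Int) (edges : List (List Int)) : Decidable (Pre_componentValue nums edges) := by
  unfold Pre_componentValue pvTree; infer_instance

def pvWitness_componentValue : List Int × List (List Int) := ([1, 1, 2], [[0, 1], [0, 2]])

def Spec_componentValue (nums : List Int) (edges : List (List Int)) (out : Int) : Prop :=
  out = componentValue_alt nums edges

instance (nums : List Int) (edges : List (List Int)) (out : Int) :
    Decidable (Spec_componentValue nums edges out) := by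
  unfold Spec_componentValue; infer_instance

-- ===== CLAIM (what is proved, stated in full; the proofs are below) =====
def Claim_equal_componentValue : Prop := ∀ (nums : List Int) (edges : List (List Int)), Dom_componentValue nums edges → Pre_componentValue nums edges → Spec_componentValue nums edges (componentValue nums edges)

-- ===== LEMMAS AND PROOFS =====

-- ================= tree theory =================

def pvNode (n : Nat) (v : Int) : Prop := 0 ≤ v ∧ v < (n : Int)

lemma pvAdjB_iff (edges : List (List Int)) (u v : Int) :
    pvAdjB edges u v = true ↔ ∃ e ∈ edges, e = [u, v] ∨ e = [v, u] := by
  simp [pvAdjB]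

lemma pvAdjB_node {n : Nat} {edges : List (List Int)} (T : pvTree n edges) {u v : Int}
    (h : pvAdjB edges u v = true) : pvNode n u ∧ pvNode n v := by
  rcases (pvAdjB_iff edges u v).1 h with ⟨e, he, hor⟩
  have := (T.1 e he).2
  rcases hor with rfl | rfl
  · exact ⟨⟨(this u (by simp)).1, (this u (by simp)).2⟩, ⟨(this v (by simp)).1, (this v (by simp)).2⟩⟩
  · exact ⟨⟨(this u (by simp)).1, (this u (by simp)).2⟩, ⟨(this v (by simp)).1, (this v (by simp)).2⟩⟩

lemma pvReach_zero (n : Nat) (edges : List (List Int)) : pvReach n edges 0 = [0] := rfl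

lemma pvReach_succ (n : Nat) (edges : List (List Int)) (k : Nat) :
    pvReach n edges (k+1) = pvStep n edges (pvReach n edges k) :=
  Function.iterate_succ_apply' _ _ _

noncomputable def pvLvl (n : Nat) (edges : List (List Int)) (v : Int) : Nat := by
  classical
  exact if h : ∃ k, v ∈ pvReach n edges k then Nat.find h else 0

lemma pvLvl_mem {n : Nat} {edges : List (List Int)} {v : Int}
    (h : ∃ k, v ∈ pvReach n edges k) : v ∈ pvReach n edges (pvLvl n edges v) := by
  classical
  unfold pvLvl
  rw [dif_pos h]
  convert Nat.find_spec h

lemma pvLvl_le {n : Nat} {edges : List (List Int)} {v : Int} {k : Nat}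
    (h : v ∈ pvReach n edges k) : pvLvl n edges v ≤ k := by
  classical
  unfold pvLvl
  rw [dif_pos ⟨k, h⟩]
  exact Nat.find_le h

lemma pvLvl_not_mem {n : Nat} {edges : List (List Int)} {v : Int} {k : Nat}
    (hex : ∃ k, v ∈ pvReach n edges k) (h : k < pvLvl n edges v) : v ∉ pvReach n edges k := by
  intro hmem
  exact absurd (pvLvl_le hmem) (not_le.2 h)

lemma pvLvl_zero_root (n : Nat) (edges : List (List Int)) : pvLvl n edges 0 = 0 := by
  have : (0:Int) ∈ pvReach n edges 0 := by simp [pvReach_zero]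
  exact Nat.le_zero.1 (pvLvl_le this)

lemma pvLvl_eq_zero_iff {n : Nat} {edges : List (List Int)} {v : Int}
    (hex : ∃ k, v ∈ pvReach n edges k) : pvLvl n edges v = 0 ↔ v = 0 := by
  constructor
  · intro h
    have := pvLvl_mem hex
    rw [h, pvReach_zero] at this
    simpa using this
  · rintro rfl; exact pvLvl_zero_root n edges

-- a node of positive level has a neighbour of strictly smaller level
lemma pvRootward_exists {n : Nat} {edges : List (List Int)} {v : Int}
    (hex : ∃ k, v ∈ pvReach n edges k) (hv : v ≠ 0) :
    ∃ u, pvAdjB edges u v = true ∧ pvLvl n edges u < pvLvl n edges v := by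
  have hpos : 0 < pvLvl n edges v := by
    rcases Nat.eq_zero_or_pos (pvLvl n edges v) with h | h
    · exact absurd ((pvLvl_eq_zero_iff hex).1 h) hv
    · exact h
  obtain ⟨m, hm⟩ : ∃ m, pvLvl n edges v = m + 1 := ⟨pvLvl n edges v - 1, by omega⟩
  have hmem := pvLvl_mem hex
  rw [hm, pvReach_succ] at hmem
  rcases List.mem_append.1 hmem with h | h
  · exact absurd h (pvLvl_not_mem hex (by omega))
  · rcases List.mem_filter.1 h with ⟨_, hcond⟩
    simp only [Bool.and_eq_true, List.any_eq_true] at hcond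
    rcases hcond.2 with ⟨u, hu, hadj⟩
    exact ⟨u, hadj, lt_of_le_of_lt (pvLvl_le hu) (by omega)⟩

def pvRt (n : Nat) (edges : List (List Int)) (u v : Int) : Prop :=
  pvAdjB edges u v = true ∧ pvLvl n edges u < pvLvl n edges v

noncomputable def pvC (n : Nat) (edges : List (List Int)) (v : Int) : Int := by
  classical
  exact if h : ∃ u, pvRt n edges u v then h.choose else 0

lemma pvC_rt {n : Nat} {edges : List (List Int)} {v : Int}
    (h : ∃ u, pvRt n edges u v) : pvRt n edges (pvC n edges v) v := by
  classical
  unfold pvC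
  rw [dif_pos h]
  convert h.choose_spec

-- every reachable node is reachable in ≤ its level
lemma pvNode_ex {n : Nat} {edges : List (List Int)} (T : pvTree n edges) {v : Int}
    (hv : pvNode n v) : ∃ k, v ∈ pvReach n edges k :=
  ⟨n, T.2.2.2 v hv.1 hv.2⟩

lemma pvRt_exists {n : Nat} {edges : List (List Int)} (T : pvTree n edges) {v : Int}
    (hv : pvNode n v) (hv0 : v ≠ 0) : ∃ u, pvRt n edges u v := by
  rcases pvRootward_exists (pvNode_ex T hv) hv0 with ⟨u, h1, h2⟩
  exact ⟨u, h1, h2⟩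

lemma pvC_rt' {n : Nat} {edges : List (List Int)} (T : pvTree n edges) {v : Int}
    (hv : pvNode n v) (hv0 : v ≠ 0) : pvRt n edges (pvC n edges v) v :=
  pvC_rt (pvRt_exists T hv hv0)

-- appended after tree.lean content
lemma pvPairCases {a b a' b' : Int} (h1 : min a b = min a' b') (h2 : max a b = max a' b') :
    (a = a' ∧ b = b') ∨ (a = b' ∧ b = a') := by omega

noncomputable def pvPhi (n : Nat) (edges : List (List Int)) (v : Int) : Int × Int :=
  pvNorm [pvC n edges v, v]

lemma pvNorm_pair (u v : Int) : pvNorm [u, v] = (min u v, max u v) := rfl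

lemma pvPhi_mem {n : Nat} {edges : List (List Int)} (T : pvTree n edges) {v : Int}
    (hv : pvNode n v) (hv0 : v ≠ 0) : pvPhi n edges v ∈ (edges.map pvNorm).toFinset := by
  have hrt := pvC_rt' T hv hv0
  rcases (pvAdjB_iff edges (pvC n edges v) v).1 hrt.1 with ⟨e, he, hor⟩
  rw [List.mem_toFinset]
  have : pvNorm e = pvPhi n edges v := by
    rcases hor with rfl | rfl
    · rfl
    · simp [pvPhi, pvNorm_pair, min_comm, max_comm]
  rw [← this]
  exact List.mem_map_of_mem he

noncomputable def pvNonroots (n : Nat) : Finset Int := Finset.Ioc 0 ((n : Int) - 1)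

lemma pvNonroots_card (n : Nat) (hn : 1 ≤ n) : (pvNonroots n).card = n - 1 := by
  unfold pvNonroots
  rw [Int.card_Ioc]
  omega

lemma pvMem_nonroots {n : Nat} {v : Int} : v ∈ pvNonroots n ↔ (pvNode n v ∧ v ≠ 0) := by
  unfold pvNonroots pvNode
  rw [Finset.mem_Ioc]
  constructor
  · intro h; exact ⟨⟨by omega, by omega⟩, by omega⟩
  · intro h; exact ⟨by rcases h with ⟨⟨h1,h2⟩,h3⟩; omega, by rcases h with ⟨⟨h1,h2⟩,_⟩; omega⟩

lemma pvPhi_injOn {n : Nat} {edges : List (List Int)} (T : pvTree n edges) :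
    Set.InjOn (pvPhi n edges) ↑(pvNonroots n) := by
  intro v hv v' hv' heq
  rw [Finset.mem_coe, pvMem_nonroots] at hv hv'
  have h1 := pvC_rt' T hv.1 hv.2
  have h2 := pvC_rt' T hv'.1 hv'.2
  unfold pvPhi at heq
  rw [pvNorm_pair, pvNorm_pair, Prod.mk.injEq] at heq
  rcases pvPairCases heq.1 heq.2 with ⟨_, h⟩ | ⟨ha, hb⟩
  · exact h
  · exfalso
    have hx1 : pvLvl n edges v' < pvLvl n edges v := by rw [← ha]; exact h1.2
    have hx2 : pvLvl n edges v < pvLvl n edges v' := by rw [hb]; exact h2.2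
    omega

lemma pvEdgesFin_card {n : Nat} {edges : List (List Int)} (T : pvTree n edges) :
    (edges.map pvNorm).toFinset.card = n - 1 := by
  rw [List.toFinset_card_of_nodup T.2.2.1, List.length_map]
  have := T.2.1
  omega

-- THE tree fact: every edge is the rootward edge of exactly one non-root
lemma pvEdge_surj {n : Nat} {edges : List (List Int)} (T : pvTree n edges) :
    ∀ e ∈ edges, ∃ v ∈ pvNonroots n, pvPhi n edges v = pvNorm e := by
  classical
  have hn : 1 ≤ n := by have := T.2.1; omega
  have himg : Finset.image (pvPhi n edges) (pvNonroots n) = (edges.map pvNorm).toFinset := by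
    apply Finset.eq_of_subset_of_card_le
    · intro x hx
      rcases Finset.mem_image.1 hx with ⟨v, hv, rfl⟩
      rcases pvMem_nonroots.1 hv with ⟨h1, h2⟩
      exact pvPhi_mem T h1 h2
    · rw [Finset.card_image_of_injOn (pvPhi_injOn T), pvEdgesFin_card T, pvNonroots_card n hn]
  intro e he
  have : pvNorm e ∈ (edges.map pvNorm).toFinset := by
    rw [List.mem_toFinset]; exact List.mem_map_of_mem he
  rw [← himg] at this
  rcases Finset.mem_image.1 this with ⟨v, hv, hphi⟩
  exact ⟨v, hv, hphi⟩

-- consequences of surjectivity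
lemma pvEdge_cases {n : Nat} {edges : List (List Int)} (T : pvTree n edges) {u w : Int}
    (h : pvAdjB edges u w = true) :
    u ≠ w ∧ ((pvC n edges w = u ∧ w ∈ pvNonroots n) ∨ (pvC n edges u = w ∧ u ∈ pvNonroots n)) := by
  rcases (pvAdjB_iff edges u w).1 h with ⟨e, he, hor⟩
  rcases pvEdge_surj T e he with ⟨v, hv, hphi⟩
  rcases pvMem_nonroots.1 hv with ⟨hvnode, hv0⟩
  have hrt := pvC_rt' T hvnode hv0
  have hcv : pvC n edges v ≠ v := fun hh => absurd hrt.2 (by rw [hh]; exact lt_irrefl _)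
  unfold pvPhi at hphi
  have hnorm : pvNorm e = (min u w, max u w) := by
    rcases hor with rfl | rfl
    · rfl
    · simp [pvNorm_pair, min_comm, max_comm]
  rw [hnorm, pvNorm_pair, Prod.mk.injEq] at hphi
  rcases pvPairCases hphi.1 hphi.2 with ⟨ha, hb⟩ | ⟨ha, hb⟩
  · -- pvC v = u, v = w
    subst hb
    exact ⟨fun hh => hcv (by rw [ha, hh]), Or.inl ⟨ha, hv⟩⟩
  · -- pvC v = w, v = u
    subst hb
    exact ⟨fun hh => hcv (by rw [ha, ← hh]), Or.inr ⟨ha, hv⟩⟩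

lemma pvAdjB_irrefl {n : Nat} {edges : List (List Int)} (T : pvTree n edges) (u : Int) :
    ¬ pvAdjB edges u u = true := fun h => (pvEdge_cases T h).1 rfl

-- uniqueness of the rootward neighbour
-- children of u are exactly its neighbours other than its own parent
lemma pvC_lvl_lt {n : Nat} {edges : List (List Int)} (T : pvTree n edges) {v : Int}
    (hv : pvNode n v) (hv0 : v ≠ 0) : pvLvl n edges (pvC n edges v) < pvLvl n edges v :=
  (pvC_rt' T hv hv0).2

lemma pvC_node {n : Nat} {edges : List (List Int)} (T : pvTree n edges) {v : Int}
    (hv : pvNode n v) (hv0 : v ≠ 0) : pvNode n (pvC n edges v) :=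
  (pvAdjB_node T (pvC_rt' T hv hv0).1).1

lemma pvC_ne {n : Nat} {edges : List (List Int)} (T : pvTree n edges) {v : Int}
    (hv : pvNode n v) (hv0 : v ≠ 0) : pvC n edges v ≠ v :=
  fun h => absurd (pvC_lvl_lt T hv hv0) (by rw [h]; exact lt_irrefl _)

lemma pvC_adj {n : Nat} {edges : List (List Int)} (T : pvTree n edges) {v : Int}
    (hv : pvNode n v) (hv0 : v ≠ 0) : pvAdjB edges (pvC n edges v) v = true :=
  (pvC_rt' T hv hv0).1

-- port-side pvAdj (copy of equiv.lean def)
-- proof-side neighbour list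
def pvNbrs : List (List Int) → Int → List Int
  | [], _ => []
  | e :: es, v =>
    (match e with
     | [u, w] => (if v = u then [w] else []) ++ (if v = w then [u] else [])
     | _ => []) ++ pvNbrs es v

lemma pvAdj_go (edges : List (List Int)) : ∀ (adj0 : Int → List Int) (v : Int),
    (edges.foldl (fun adj e =>
      match e with
      | [u, w] =>
          let a1 : Int → List Int := Function.update adj u (adj u ++ [w])
          Function.update a1 w (a1 w ++ [u])
      | _ => adj) adj0) v = adj0 v ++ pvNbrs edges v := by
  induction edges with
  | nil => intro adj0 v; simp [pvNbrs]
  | cons e es ih =>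
    intro adj0 v
    rw [List.foldl_cons, ih]
    have : (match e with
      | [u, w] =>
          let a1 : Int → List Int := Function.update adj0 u (adj0 u ++ [w])
          Function.update a1 w (a1 w ++ [u])
      | _ => adj0) v = adj0 v ++ (match e with
     | [u, w'] => (if v = u then [w'] else []) ++ (if v = w' then [u] else [])
     | _ => ([] : List Int)) := by
      rcases e with _ | ⟨u, _ | ⟨w, _ | ⟨x, rest⟩⟩⟩ <;>
        simp only [Function.update_apply, List.append_nil] <;> try simp
      split_ifs <;> simp_all
    rw [this, List.append_assoc]
    rcases e with _ | ⟨u, _ | ⟨w, _ | ⟨x, rest⟩⟩⟩ <;> simp [pvNbrs]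

lemma pvAdj_eq_nbrs (edges : List (List Int)) (v : Int) :
    pvAdj edges v = pvNbrs edges v := by
  have := pvAdj_go edges (fun _ => []) v
  simpa [pvAdj] using this

lemma pvHead_contrib (e : List Int) (v w : Int) :
    (w ∈ (match e with
     | [u, w'] => (if v = u then [w'] else []) ++ (if v = w' then [u] else [])
     | _ => ([] : List Int))) ↔ (e = [v, w] ∨ e = [w, v]) := by
  rcases e with _ | ⟨u, _ | ⟨w', _ | ⟨x, rest⟩⟩⟩ <;> simp <;>
    constructor <;> intro h <;> tauto

lemma pvMem_nbrs (edges : List (List Int)) (v w : Int) :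
    w ∈ pvNbrs edges v ↔ pvAdjB edges v w = true := by
  induction edges with
  | nil => simp [pvNbrs, pvAdjB]
  | cons e es ih =>
    simp only [pvNbrs, List.mem_append, ih, pvAdjB_iff]
    constructor
    · rintro (h | h)
      · exact ⟨e, by simp, (pvHead_contrib e v w).1 h⟩
      · rcases h with ⟨e', he', hor⟩
        exact ⟨e', List.mem_cons_of_mem _ he', hor⟩
    · rintro ⟨e', he', hor⟩
      rcases List.mem_cons.1 he' with rfl | he''
      · exact Or.inl ((pvHead_contrib e' v w).2 hor)
      · exact Or.inr ⟨e', he'', hor⟩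

lemma pvNorm_of_mem_nbrs {edges : List (List Int)} {v w : Int} (h : w ∈ pvNbrs edges v) :
    (min v w, max v w) ∈ edges.map pvNorm := by
  rcases (pvAdjB_iff edges v w).1 ((pvMem_nbrs edges v w).1 h) with ⟨e, he, hor⟩
  have : pvNorm e = (min v w, max v w) := by
    rcases hor with rfl | rfl
    · rfl
    · simp [pvNorm_pair, min_comm, max_comm]
  exact this ▸ List.mem_map_of_mem he

lemma pvNbrs_nodup_aux {edges : List (List Int)} {v : Int}
    (hnodup : (edges.map pvNorm).Nodup) (hns : ∀ e ∈ edges, ∀ x : Int, e ≠ [x, x]) :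
    (pvNbrs edges v).Nodup := by
  induction edges with
  | nil => simp [pvNbrs]
  | cons e es ih =>
    simp only [List.map_cons, List.nodup_cons] at hnodup
    have hes : (pvNbrs es v).Nodup := ih hnodup.2 (fun e' he' => hns e' (List.mem_cons_of_mem _ he'))
    have hdisj : ∀ x, (x ∈ pvNbrs ([e] : List (List Int)) v) → x ∉ pvNbrs es v := by
      intro x hx hx'
      have hcase := (pvHead_contrib e v x).1 (by simpa [pvNbrs] using hx)
      have : pvNorm e = (min v x, max v x) := by
        rcases hcase with rfl | rfl
        · rfl
        · simp [pvNorm_pair, min_comm, max_comm]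
      exact hnodup.1 (this ▸ pvNorm_of_mem_nbrs hx')
    rcases e with _ | ⟨u, _ | ⟨w, _ | ⟨y, rest⟩⟩⟩
    · simpa [pvNbrs] using hes
    · simpa [pvNbrs] using hes
    case cons.cons.nil =>
      have hne : ¬ (v = u ∧ v = w) := by
        rintro ⟨rfl, rfl⟩
        exact (hns [v, v] (by simp) v) rfl
      simp only [pvNbrs]
      by_cases h1 : v = u <;> by_cases h2 : v = w
      · exact absurd ⟨h1, h2⟩ hne
      · subst h1
        have hd := hdisj w (by simp [pvNbrs, h2])
        simp only [if_true, eq_self_iff_true, if_neg h2, List.singleton_append, List.nil_append,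
          List.append_nil, List.nodup_cons, if_pos trivial]
        exact ⟨by simpa using hd, hes⟩
      · subst h2
        have hd := hdisj u (by simp [pvNbrs, h1])
        simp only [if_true, eq_self_iff_true, if_neg h1, List.singleton_append, List.nil_append,
          List.append_nil, List.nodup_cons, if_pos trivial]
        exact ⟨by simpa using hd, hes⟩
      · simp only [if_neg h1, if_neg h2, List.nil_append]
        exact hes
    · simpa [pvNbrs] using hes

lemma pvNbrs_nodup {n : Nat} {edges : List (List Int)} (T : pvTree n edges) (v : Int) :
    (pvNbrs edges v).Nodup := by
  apply pvNbrs_nodup_aux T.2.2.1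
  intro e he x hx
  subst hx
  exact pvAdjB_irrefl T x ((pvAdjB_iff edges x x).2 ⟨[x, x], he, by simp⟩)

noncomputable def pvCs (n : Nat) (edges : List (List Int)) (v : Int) : Finset Int := by
  classical
  exact (pvNonroots n).filter (fun x => pvC n edges x = v)

lemma pvMem_Cs {n : Nat} {edges : List (List Int)} {v x : Int} :
    x ∈ pvCs n edges v ↔ ((pvNode n x ∧ x ≠ 0) ∧ pvC n edges x = v) := by
  classical
  unfold pvCs
  rw [Finset.filter_congr_decidable, Finset.mem_filter, pvMem_nonroots]

lemma pvCs_lvl {n : Nat} {edges : List (List Int)} (T : pvTree n edges) {v x : Int}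
    (h : x ∈ pvCs n edges v) : pvLvl n edges v < pvLvl n edges x := by
  rcases pvMem_Cs.1 h with ⟨⟨hx, hx0⟩, hc⟩
  have := pvC_lvl_lt T hx hx0
  rwa [hc] at this

lemma pvLvl_le_n {n : Nat} {edges : List (List Int)} (T : pvTree n edges) {v : Int}
    (hv : pvNode n v) : pvLvl n edges v ≤ n :=
  pvLvl_le (T.2.2.2 v hv.1 hv.2)

lemma pvLvl_pos {n : Nat} {edges : List (List Int)} (T : pvTree n edges) {v : Int}
    (hv : pvNode n v) (hv0 : v ≠ 0) : 1 ≤ pvLvl n edges v := by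
  rcases Nat.eq_zero_or_pos (pvLvl n edges v) with h | h
  · exact absurd ((pvLvl_eq_zero_iff (pvNode_ex T hv)).1 h) hv0
  · exact h

noncomputable def pvResid (n : Nat) (edges : List (List Int)) (nums0 : Int → Int) (t : Int) :
    Nat → Int → Int
  | 0, _ => 0
  | f+1, v => nums0 v + ∑ x ∈ pvCs n edges v,
      (if pvResid n edges nums0 t f x = t then 0 else pvResid n edges nums0 t f x)

lemma pvResid_stable {n : Nat} {edges : List (List Int)} (T : pvTree n edges)
    (nums0 : Int → Int) (t : Int) :
    ∀ (d : Nat) (v : Int) (f g : Nat), pvNode n v → n - pvLvl n edges v ≤ d →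
      n + 1 - pvLvl n edges v ≤ f → n + 1 - pvLvl n edges v ≤ g →
      pvResid n edges nums0 t f v = pvResid n edges nums0 t g v := by
  intro d
  induction d with
  | zero =>
    intro v f g hv hd hf hg
    have hle := pvLvl_le_n T hv
    have hlv : pvLvl n edges v = n := by omega
    have hcs : pvCs n edges v = ∅ := by
      apply Finset.eq_empty_of_forall_notMem
      intro x hx
      have h1 := pvCs_lvl T hx
      have h2 := pvLvl_le_n T (pvMem_Cs.1 hx).1.1
      omega
    obtain ⟨f', rfl⟩ : ∃ f', f = f' + 1 := ⟨f - 1, by omega⟩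
    obtain ⟨g', rfl⟩ : ∃ g', g = g' + 1 := ⟨g - 1, by omega⟩
    simp [pvResid, hcs]
  | succ d ih =>
    intro v f g hv hd hf hg
    have hle := pvLvl_le_n T hv
    obtain ⟨f', rfl⟩ : ∃ f', f = f' + 1 := ⟨f - 1, by omega⟩
    obtain ⟨g', rfl⟩ : ∃ g', g = g' + 1 := ⟨g - 1, by omega⟩
    simp only [pvResid]
    congr 1
    apply Finset.sum_congr rfl
    intro x hx
    have h1 := pvCs_lvl T hx
    have hxn := (pvMem_Cs.1 hx).1.1
    have h2 := pvLvl_le_n T hxn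
    have : pvResid n edges nums0 t f' x = pvResid n edges nums0 t g' x :=
      ih x f' g' hxn (by omega) (by omega) (by omega)
    rw [this]

noncomputable def pvSval (n : Nat) (edges : List (List Int)) (nums0 : Int → Int) (t : Int)
    (v : Int) : Int :=
  pvResid n edges nums0 t (n + 1) v

lemma pvSval_rec {n : Nat} {edges : List (List Int)} (T : pvTree n edges)
    (nums0 : Int → Int) (t : Int) {v : Int} (hv : pvNode n v) :
    pvSval n edges nums0 t v = nums0 v + ∑ x ∈ pvCs n edges v,
      (if pvSval n edges nums0 t x = t then 0 else pvSval n edges nums0 t x) := by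
  unfold pvSval
  have hunf : pvResid n edges nums0 t (n + 1) v = nums0 v + ∑ x ∈ pvCs n edges v,
      (if pvResid n edges nums0 t n x = t then 0 else pvResid n edges nums0 t n x) := rfl
  rw [hunf]
  congr 1
  apply Finset.sum_congr rfl
  intro x hx
  have hxn := (pvMem_Cs.1 hx).1.1
  have hx0 := (pvMem_Cs.1 hx).1.2
  have h1 := pvLvl_pos T hxn hx0
  have h2 := pvLvl_le_n T hxn
  have : pvResid n edges nums0 t n x = pvResid n edges nums0 t (n + 1) x :=
    pvResid_stable T nums0 t (n - pvLvl n edges x) x n (n+1) hxn (by omega) (by omega) (by omega)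
  rw [this]

noncomputable def pvAllNodes (n : Nat) : Finset Int := Finset.Icc (0 : Int) ((n : Int) - 1)

lemma pvMem_allNodes {n : Nat} {v : Int} : v ∈ pvAllNodes n ↔ pvNode n v := by
  unfold pvAllNodes pvNode
  rw [Finset.mem_Icc]
  omega

noncomputable def pvCnt (n : Nat) (edges : List (List Int)) (nums0 : Int → Int) (t : Int) : Nat := by
  classical
  exact ((pvAllNodes n).filter (fun x => pvSval n edges nums0 t x = t)).card

-- helpers for the invariants
noncomputable def pvRv (n : Nat) (edges : List (List Int)) (nums0 : Int → Int) (t c : Int) : Int :=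
  if pvSval n edges nums0 t c = t then 0 else pvSval n edges nums0 t c

noncomputable def pvPCnt (n : Nat) (edges : List (List Int)) (nums0 : Int → Int) (t : Int)
    (P : Finset Int) : Nat := by
  classical
  exact (P.filter (fun x => pvSval n edges nums0 t x = t)).card

noncomputable def pvSsum (n : Nat) (edges : List (List Int)) (nums0 : Int → Int) (t : Int)
    (P : Finset Int) (v : Int) : Int := by
  classical
  exact ∑ c ∈ (pvCs n edges v).filter (· ∈ P), pvRv n edges nums0 t c

lemma pvPCnt_allNodes (n : Nat) (edges : List (List Int)) (nums0 : Int → Int) (t : Int) :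
    pvPCnt n edges nums0 t (pvAllNodes n) = pvCnt n edges nums0 t := by
  classical
  unfold pvPCnt pvCnt
  congr 1

lemma pvPCnt_insert {n : Nat} {edges : List (List Int)} (nums0 : Int → Int) (t : Int)
    {P : Finset Int} {u : Int} (hu : u ∉ P) :
    pvPCnt n edges nums0 t (insert u P) =
      pvPCnt n edges nums0 t P + (if pvSval n edges nums0 t u = t then 1 else 0) := by
  classical
  unfold pvPCnt
  rw [Finset.filter_insert]
  split_ifs with h
  · rw [Finset.card_insert_of_notMem (fun hc => hu (Finset.mem_of_mem_filter u hc))]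
  · rfl

lemma pvPCnt_mono {n : Nat} {edges : List (List Int)} (nums0 : Int → Int) (t : Int)
    {P Q : Finset Int} (h : P ⊆ Q) :
    pvPCnt n edges nums0 t P ≤ pvPCnt n edges nums0 t Q := by
  classical
  unfold pvPCnt
  exact Finset.card_le_card (Finset.filter_subset_filter _ h)

lemma pvPCnt_le_cnt {n : Nat} {edges : List (List Int)} (nums0 : Int → Int) (t : Int)
    {P : Finset Int} (h : ∀ x ∈ P, pvNode n x) :
    pvPCnt n edges nums0 t P ≤ pvCnt n edges nums0 t := by
  rw [← pvPCnt_allNodes]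
  exact pvPCnt_mono nums0 t (fun x hx => pvMem_allNodes.2 (h x hx))

lemma pvSsum_insert {n : Nat} {edges : List (List Int)} (nums0 : Int → Int) (t : Int)
    {P : Finset Int} {u : Int} (hu : u ∉ P) (v : Int) :
    pvSsum n edges nums0 t (insert u P) v =
      pvSsum n edges nums0 t P v +
        (if u ∈ pvCs n edges v then pvRv n edges nums0 t u else 0) := by
  classical
  unfold pvSsum
  have : (pvCs n edges v).filter (· ∈ insert u P) =
      if u ∈ pvCs n edges v then insert u ((pvCs n edges v).filter (· ∈ P))
      else (pvCs n edges v).filter (· ∈ P) := by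
    split_ifs with h
    · ext c
      simp only [Finset.mem_filter, Finset.mem_insert]
      constructor
      · rintro ⟨hc, rfl | hc'⟩
        · exact Or.inl rfl
        · exact Or.inr ⟨hc, hc'⟩
      · rintro (rfl | ⟨hc, hc'⟩)
        · exact ⟨h, Or.inl rfl⟩
        · exact ⟨hc, Or.inr hc'⟩
    · ext c
      simp only [Finset.mem_filter, Finset.mem_insert]
      constructor
      · rintro ⟨hc, rfl | hc'⟩
        · exact absurd hc h
        · exact ⟨hc, hc'⟩
      · rintro ⟨hc, hc'⟩
        exact ⟨hc, Or.inr hc'⟩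
  rw [this]
  split_ifs with h
  · rw [Finset.sum_insert (by simp [Finset.mem_filter, hu])]
    ring
  · ring

lemma pvSsum_full {n : Nat} {edges : List (List Int)} (T : pvTree n edges)
    (nums0 : Int → Int) (t : Int) {P : Finset Int} {v : Int} (hv : pvNode n v)
    (h : ∀ c ∈ pvCs n edges v, c ∈ P) :
    nums0 v + pvSsum n edges nums0 t P v = pvSval n edges nums0 t v := by
  classical
  unfold pvSsum
  rw [Finset.filter_true_of_mem h, pvSval_rec T nums0 t hv]
  rfl

lemma pvPeelA_char {n : Nat} {edges : List (List Int)} (T : pvTree n edges)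
    (nums0 : Int → Int) (t needed : Int) (parent : Int → Int)
    (hpar : ∀ x, pvNode n x → x ≠ 0 → parent x = pvC n edges x) (hpar0 : parent 0 = 0) :
    ∀ (os : List Int) (P : Finset Int) (subSum : Int → Int) (count : Int),
      os.Nodup →
      (∀ x ∈ os, pvNode n x) →
      (∀ x ∈ P, pvNode n x) →
      (∀ x ∈ os, x ∉ P) →
      (∀ x, pvNode n x → x ∈ P ∨ x ∈ os) →
      (∀ x ∈ os, ∀ c, c ∈ pvCs n edges x → c ∈ P ∨ (c ∈ os ∧ os.idxOf c < os.idxOf x)) →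
      (0 ∈ os ∨ pvSval n edges nums0 t 0 = t) →
      (∀ v, pvNode n v → subSum v = nums0 v + pvSsum n edges nums0 t P v) →
      (count = (pvPCnt n edges nums0 t P : Int)) →
      pvPeelA os parent t needed subSum count =
        decide (pvSval n edges nums0 t 0 = t ∧ ((pvCnt n edges nums0 t : Int) = needed)) := by
  classical
  intro os
  induction os with
  | nil =>
    intro P subSum count _ _ hPnode _ hcov _ h0 _ hcnt
    have hP : P = pvAllNodes n := by
      apply Finset.ext
      intro x
      rw [pvMem_allNodes]
      constructor
      · exact hPnode x
      · intro hx
        rcases hcov x hx with h | h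
        · exact h
        · exact absurd h (List.not_mem_nil)
    have h0' : pvSval n edges nums0 t 0 = t := by
      rcases h0 with h | h
      · exact absurd h (List.not_mem_nil)
      · exact h
    show decide (count = needed) = _
    rw [hcnt, hP, pvPCnt_allNodes]
    simp [h0']
  | cons u os' ih =>
    intro P subSum count hnodup hosnode hPnode hdisj hcov hcb h0 hsub hcnt
    have hunode : pvNode n u := hosnode u List.mem_cons_self
    have huP : u ∉ P := hdisj u List.mem_cons_self
    have hchild : ∀ c ∈ pvCs n edges u, c ∈ P := by
      intro c hc
      rcases hcb u List.mem_cons_self c hc with h | ⟨_, hidx⟩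
      · exact h
      · rw [List.idxOf_cons_self] at hidx
        omega
    have hsubu : subSum u = pvSval n edges nums0 t u := by
      rw [hsub u hunode, pvSsum_full T nums0 t hunode hchild]
    -- common re-establishment of the invariants for P' = insert u P
    have hPnode' : ∀ x ∈ insert u P, pvNode n x := by
      intro x hx
      rcases Finset.mem_insert.1 hx with rfl | hx'
      · exact hunode
      · exact hPnode x hx'
    have hnodup' := (List.nodup_cons.1 hnodup).2
    have hu_nin : u ∉ os' := (List.nodup_cons.1 hnodup).1
    have hosnode' : ∀ x ∈ os', pvNode n x := fun x hx => hosnode x (List.mem_cons_of_mem _ hx)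
    have hdisj' : ∀ x ∈ os', x ∉ insert u P := by
      intro x hx hmem
      rcases Finset.mem_insert.1 hmem with rfl | hx'
      · exact hu_nin hx
      · exact hdisj x (List.mem_cons_of_mem _ hx) hx'
    have hcov' : ∀ x, pvNode n x → x ∈ insert u P ∨ x ∈ os' := by
      intro x hx
      rcases hcov x hx with h | h
      · exact Or.inl (Finset.mem_insert.2 (Or.inr h))
      · rcases List.mem_cons.1 h with rfl | h'
        · exact Or.inl (Finset.mem_insert_self _ _)
        · exact Or.inr h'
    have hcb' : ∀ x ∈ os', ∀ c, c ∈ pvCs n edges x →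
        c ∈ insert u P ∨ (c ∈ os' ∧ os'.idxOf c < os'.idxOf x) := by
      intro x hx c hc
      rcases hcb x (List.mem_cons_of_mem _ hx) c hc with h | ⟨hcos, hidx⟩
      · exact Or.inl (Finset.mem_insert.2 (Or.inr h))
      · rcases List.mem_cons.1 hcos with rfl | hcos'
        · exact Or.inl (Finset.mem_insert_self _ _)
        · refine Or.inr ⟨hcos', ?_⟩
          have hxu : x ≠ u := fun hh => hu_nin (hh ▸ hx)
          have hcu : c ≠ u := fun hh => hu_nin (hh ▸ hcos')
          rw [List.idxOf_cons_ne _ (by simpa using (Ne.symm hcu)),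
            List.idxOf_cons_ne _ (by simpa using (Ne.symm hxu))] at hidx
          omega
    by_cases hS : pvSval n edges nums0 t u = t
    · -- counted subtree
      have LHS : pvPeelA (u :: os') parent t needed subSum count =
          (if count + 1 > needed then false
           else pvPeelA os' parent t needed subSum (count + 1)) := by
        simp [pvPeelA, hsubu, hS]
      rw [LHS]
      have hcnt' : count + 1 = (pvPCnt n edges nums0 t (insert u P) : Int) := by
        rw [pvPCnt_insert nums0 t huP, hcnt]
        simp [hS]
      by_cases hbig : count + 1 > needed
      · rw [if_pos hbig]
        have hle : pvPCnt n edges nums0 t (insert u P) ≤ pvCnt n edges nums0 t :=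
          pvPCnt_le_cnt nums0 t hPnode'
        symm
        simp only [decide_eq_false_iff_not]
        rintro ⟨_, hcnteq⟩
        omega
      · rw [if_neg hbig]
        have h0' : 0 ∈ os' ∨ pvSval n edges nums0 t 0 = t := by
          rcases h0 with h | h
          · rcases List.mem_cons.1 h with h' | h'
            · right; rw [h']; exact hS
            · left; exact h'
          · right; exact h
        have hsub' : ∀ v, pvNode n v → subSum v =
            nums0 v + pvSsum n edges nums0 t (insert u P) v := by
          intro v hv
          rw [hsub v hv, pvSsum_insert nums0 t huP v]
          have : (if u ∈ pvCs n edges v then pvRv n edges nums0 t u else 0) = 0 := by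
            split_ifs
            · unfold pvRv; simp [hS]
            · rfl
          rw [this, add_zero]
        exact ih (insert u P) subSum (count + 1) hnodup' hosnode' hPnode' hdisj' hcov'
          hcb' h0' hsub' hcnt'
    · -- not counted: pass the sum up to the parent
      by_cases hu0 : u = 0
      · -- failing at the root
        subst hu0
        have LHS : pvPeelA (0 :: os') parent t needed subSum count = false := by
          simp [pvPeelA, hsubu, hS, hpar0]
        rw [LHS]
        symm
        simp only [decide_eq_false_iff_not]
        rintro ⟨h1, _⟩
        exact hS h1
      · have hp : parent u = pvC n edges u := hpar u hunode hu0
        have hpne : parent u ≠ u := by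
          rw [hp]; exact pvC_ne T hunode hu0
        have LHS : pvPeelA (u :: os') parent t needed subSum count =
            (if count > needed then false
             else pvPeelA os' parent t needed
               (Function.update subSum (parent u) (subSum (parent u) + subSum u)) count) := by
          simp only [pvPeelA, hsubu, if_neg hS, if_neg hpne]
        rw [LHS]
        by_cases hbig : count > needed
        · rw [if_pos hbig]
          have hle : pvPCnt n edges nums0 t P ≤ pvCnt n edges nums0 t :=
            pvPCnt_le_cnt nums0 t hPnode
          symm
          simp only [decide_eq_false_iff_not]
          rintro ⟨_, hcnteq⟩
          omega
        · rw [if_neg hbig]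
          have h0' : 0 ∈ os' ∨ pvSval n edges nums0 t 0 = t := by
            rcases h0 with h | h
            · rcases List.mem_cons.1 h with h' | h'
              · exact absurd h'.symm hu0
              · left; exact h'
            · right; exact h
          have hcnt' : count = (pvPCnt n edges nums0 t (insert u P) : Int) := by
            rw [pvPCnt_insert nums0 t huP, hcnt]
            simp [hS]
          have hucs : u ∈ pvCs n edges (parent u) := by
            rw [hp]
            exact pvMem_Cs.2 ⟨⟨hunode, hu0⟩, rfl⟩
          have hsub' : ∀ v, pvNode n v →
              Function.update subSum (parent u) (subSum (parent u) + subSum u) v =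
              nums0 v + pvSsum n edges nums0 t (insert u P) v := by
            intro v hv
            rw [Function.update_apply]
            rw [pvSsum_insert nums0 t huP v]
            by_cases hvp : v = parent u
            · rw [if_pos hvp, hsub (parent u) (hvp ▸ hv), hsubu]
              subst hvp
              rw [if_pos hucs]
              unfold pvRv
              rw [if_neg hS]
              ring
            · rw [if_neg hvp, hsub v hv]
              have : u ∉ pvCs n edges v := by
                intro hmem
                have := (pvMem_Cs.1 hmem).2
                have := (pvMem_Cs.1 hucs).2
                exact hvp (by omega)
              rw [if_neg this, add_zero]
          exact ih (insert u P) _ count hnodup' hosnode' hPnode' hdisj' hcov'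
            hcb' h0' hsub' hcnt'

lemma pvSsum_empty (n : Nat) (edges : List (List Int)) (nums0 : Int → Int) (t v : Int) :
    pvSsum n edges nums0 t ∅ v = 0 := by
  classical
  unfold pvSsum
  rw [Finset.filter_false_of_mem (fun c _ => Finset.notMem_empty c), Finset.sum_empty]

lemma pvPCnt_empty (n : Nat) (edges : List (List Int)) (nums0 : Int → Int) (t : Int) :
    pvPCnt n edges nums0 t ∅ = 0 := by
  classical
  unfold pvPCnt
  simp

lemma pvCnt_split {n : Nat} (edges : List (List Int)) (nums0 : Int → Int) (t : Int)
    (hn : 1 ≤ n) :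
    (pvCnt n edges nums0 t : Int) =
      (pvPCnt n edges nums0 t (pvNonroots n) : Int) +
        (if pvSval n edges nums0 t 0 = t then 1 else 0) := by
  classical
  have hsplit : pvAllNodes n = insert 0 (pvNonroots n) := by
    apply Finset.ext
    intro x
    rw [pvMem_allNodes, Finset.mem_insert, pvMem_nonroots]
    unfold pvNode
    constructor
    · intro h
      by_cases hx : x = 0
      · exact Or.inl hx
      · exact Or.inr ⟨h, hx⟩
    · rintro (rfl | ⟨h, _⟩)
      · exact ⟨le_refl _, by exact_mod_cast hn⟩
      · exact h
  have h0 : (0 : Int) ∉ pvNonroots n := by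
    rw [pvMem_nonroots]; simp
  rw [← pvPCnt_allNodes, hsplit, pvPCnt_insert nums0 t h0]
  split_ifs <;> push_cast <;> ring

lemma pvPeelB_char {n : Nat} {edges : List (List Int)} (T : pvTree n edges)
    (nums0 : Int → Int) (t : Int) (parent : Int → Int)
    (hpar : ∀ x, pvNode n x → x ≠ 0 → parent x = pvC n edges x) :
    ∀ (os : List Int) (P : Finset Int) (subSum : Int → Int) (count : Int),
      os.Nodup →
      (∀ x ∈ os, pvNode n x) →
      (∀ x ∈ P, pvNode n x ∧ x ≠ 0) →
      (∀ x ∈ os, x ∉ P) →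
      (∀ x, pvNode n x → x ≠ 0 → x ∈ P ∨ x ∈ os) →
      (∀ x ∈ os, ∀ c, c ∈ pvCs n edges x → c ∈ P ∨ (c ∈ os ∧ os.idxOf c < os.idxOf x)) →
      (∀ v, pvNode n v → subSum v = nums0 v + pvSsum n edges nums0 t P v) →
      (count = (pvPCnt n edges nums0 t P : Int)) →
      (pvPeelB os parent t subSum count).1 0 = pvSval n edges nums0 t 0 ∧
      (pvPeelB os parent t subSum count).2 = (pvPCnt n edges nums0 t (pvNonroots n) : Int) := by
  classical
  have hn : 1 ≤ n := by have := T.2.1; omega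
  have h0node : pvNode n 0 := ⟨le_refl _, by exact_mod_cast hn⟩
  intro os
  induction os with
  | nil =>
    intro P subSum count _ _ hPnode _ hcov hcb hsub hcnt
    have hP : P = pvNonroots n := by
      apply Finset.ext
      intro x
      rw [pvMem_nonroots]
      constructor
      · exact hPnode x
      · intro hx
        rcases hcov x hx.1 hx.2 with h | h
        · exact h
        · exact absurd h (List.not_mem_nil)
    have hchild0 : ∀ c ∈ pvCs n edges 0, c ∈ P := by
      intro c hc
      rw [hP, pvMem_nonroots]
      exact (pvMem_Cs.1 hc).1
    constructor
    · show subSum 0 = _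
      rw [hsub 0 h0node, pvSsum_full T nums0 t h0node hchild0]
    · show count = _
      rw [hcnt, hP]
  | cons u os' ih =>
    intro P subSum count hnodup hosnode hPnode hdisj hcov hcb hsub hcnt
    have hunode : pvNode n u := hosnode u List.mem_cons_self
    have huP : u ∉ P := hdisj u List.mem_cons_self
    have hnodup' := (List.nodup_cons.1 hnodup).2
    have hu_nin : u ∉ os' := (List.nodup_cons.1 hnodup).1
    have hosnode' : ∀ x ∈ os', pvNode n x := fun x hx => hosnode x (List.mem_cons_of_mem _ hx)
    by_cases hu0 : u = 0
    · -- root: skipped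
      subst hu0
      have LHS : pvPeelB (0 :: os') parent t subSum count =
          pvPeelB os' parent t subSum count := by simp [pvPeelB]
      rw [LHS]
      apply ih P subSum count hnodup' hosnode' hPnode (fun x hx => hdisj x (List.mem_cons_of_mem _ hx))
      · intro x hx hx0
        rcases hcov x hx hx0 with h | h
        · exact Or.inl h
        · rcases List.mem_cons.1 h with h' | h'
          · exact absurd h' hx0
          · exact Or.inr h'
      · intro x hx c hc
        rcases hcb x (List.mem_cons_of_mem _ hx) c hc with h | ⟨hcos, hidx⟩
        · exact Or.inl h
        · have hc0 : c ≠ 0 := (pvMem_Cs.1 hc).1.2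
          rcases List.mem_cons.1 hcos with h' | h'
          · exact absurd h' hc0
          · refine Or.inr ⟨h', ?_⟩
            have hx0 : x ≠ 0 := fun hh => hu_nin (hh ▸ hx)
            rw [List.idxOf_cons_ne _ (by simpa using (Ne.symm hc0)),
              List.idxOf_cons_ne _ (by simpa using (Ne.symm hx0))] at hidx
            omega
      · exact hsub
      · exact hcnt
    · -- non-root
      have hchild : ∀ c ∈ pvCs n edges u, c ∈ P := by
        intro c hc
        rcases hcb u List.mem_cons_self c hc with h | ⟨_, hidx⟩
        · exact h
        · rw [List.idxOf_cons_self] at hidx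
          omega
      have hsubu : subSum u = pvSval n edges nums0 t u := by
        rw [hsub u hunode, pvSsum_full T nums0 t hunode hchild]
      have hPnode' : ∀ x ∈ insert u P, pvNode n x ∧ x ≠ 0 := by
        intro x hx
        rcases Finset.mem_insert.1 hx with rfl | hx'
        · exact ⟨hunode, hu0⟩
        · exact hPnode x hx'
      have hdisj' : ∀ x ∈ os', x ∉ insert u P := by
        intro x hx hmem
        rcases Finset.mem_insert.1 hmem with rfl | hx'
        · exact hu_nin hx
        · exact hdisj x (List.mem_cons_of_mem _ hx) hx'
      have hcov' : ∀ x, pvNode n x → x ≠ 0 → x ∈ insert u P ∨ x ∈ os' := by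
        intro x hx hx0
        rcases hcov x hx hx0 with h | h
        · exact Or.inl (Finset.mem_insert.2 (Or.inr h))
        · rcases List.mem_cons.1 h with rfl | h'
          · exact Or.inl (Finset.mem_insert_self _ _)
          · exact Or.inr h'
      have hcb' : ∀ x ∈ os', ∀ c, c ∈ pvCs n edges x →
          c ∈ insert u P ∨ (c ∈ os' ∧ os'.idxOf c < os'.idxOf x) := by
        intro x hx c hc
        rcases hcb x (List.mem_cons_of_mem _ hx) c hc with h | ⟨hcos, hidx⟩
        · exact Or.inl (Finset.mem_insert.2 (Or.inr h))
        · rcases List.mem_cons.1 hcos with rfl | hcos'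
          · exact Or.inl (Finset.mem_insert_self _ _)
          · refine Or.inr ⟨hcos', ?_⟩
            have hxu : x ≠ u := fun hh => hu_nin (hh ▸ hx)
            have hcu : c ≠ u := fun hh => hu_nin (hh ▸ hcos')
            rw [List.idxOf_cons_ne _ (by simpa using (Ne.symm hcu)),
              List.idxOf_cons_ne _ (by simpa using (Ne.symm hxu))] at hidx
            omega
      by_cases hS : pvSval n edges nums0 t u = t
      · have LHS : pvPeelB (u :: os') parent t subSum count =
            pvPeelB os' parent t subSum (count + 1) := by
          simp [pvPeelB, hu0, hsubu, hS]
        rw [LHS]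
        have hcnt' : count + 1 = (pvPCnt n edges nums0 t (insert u P) : Int) := by
          rw [pvPCnt_insert nums0 t huP, hcnt]
          simp [hS]
        have hsub' : ∀ v, pvNode n v → subSum v =
            nums0 v + pvSsum n edges nums0 t (insert u P) v := by
          intro v hv
          rw [hsub v hv, pvSsum_insert nums0 t huP v]
          have : (if u ∈ pvCs n edges v then pvRv n edges nums0 t u else 0) = 0 := by
            split_ifs
            · unfold pvRv; simp [hS]
            · rfl
          rw [this, add_zero]
        exact ih (insert u P) subSum (count + 1) hnodup' hosnode' hPnode' hdisj' hcov'
          hcb' hsub' hcnt'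
      · have LHS : pvPeelB (u :: os') parent t subSum count =
            pvPeelB os' parent t
              (Function.update subSum (parent u) (subSum (parent u) + subSum u)) count := by
          simp [pvPeelB, hu0, hsubu, hS]
        rw [LHS]
        have hcnt' : count = (pvPCnt n edges nums0 t (insert u P) : Int) := by
          rw [pvPCnt_insert nums0 t huP, hcnt]
          simp [hS]
        have hp : parent u = pvC n edges u := hpar u hunode hu0
        have hucs : u ∈ pvCs n edges (parent u) := by
          rw [hp]
          exact pvMem_Cs.2 ⟨⟨hunode, hu0⟩, rfl⟩
        have hsub' : ∀ v, pvNode n v →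
            Function.update subSum (parent u) (subSum (parent u) + subSum u) v =
            nums0 v + pvSsum n edges nums0 t (insert u P) v := by
          intro v hv
          rw [Function.update_apply, pvSsum_insert nums0 t huP v]
          by_cases hvp : v = parent u
          · rw [if_pos hvp, hsub (parent u) (hvp ▸ hv), hsubu]
            subst hvp
            rw [if_pos hucs]
            unfold pvRv
            rw [if_neg hS]
            ring
          · rw [if_neg hvp, hsub v hv]
            have : u ∉ pvCs n edges v := by
              intro hmem
              have := (pvMem_Cs.1 hmem).2
              have := (pvMem_Cs.1 hucs).2
              exact hvp (by omega)
            rw [if_neg this, add_zero]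
        exact ih (insert u P) _ count hnodup' hosnode' hPnode' hdisj' hcov' hcb' hsub' hcnt'

lemma pvGo_eq {n : Nat} {edges : List (List Int)} (T : pvTree n edges)
    (nums0 : Int → Int) (total : Int)
    (orderA : List Int) (parentA : Int → Int) (orderB : List Int) (parentB : Int → Int)
    (hA1 : orderA.Nodup) (hA2 : ∀ x, x ∈ orderA ↔ pvNode n x)
    (hA3 : ∀ x ∈ orderA, ∀ c, c ∈ pvCs n edges x →
      c ∈ orderA ∧ orderA.idxOf c < orderA.idxOf x)
    (hA4 : ∀ x, pvNode n x → x ≠ 0 → parentA x = pvC n edges x) (hA5 : parentA 0 = 0)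
    (hB1 : orderB.Nodup) (hB2 : ∀ x, x ∈ orderB ↔ pvNode n x)
    (hB3 : ∀ x ∈ orderB, ∀ c, c ∈ pvCs n edges x →
      c ∈ orderB ∧ orderB.idxOf c < orderB.idxOf x)
    (hB4 : ∀ x, pvNode n x → x ≠ 0 → parentB x = pvC n edges x) :
    ∀ divs, pvGoA divs orderA parentA total nums0 = pvGoB divs orderB parentB total nums0 := by
  classical
  have hn : 1 ≤ n := by have := T.2.1; omega
  have h0node : pvNode n 0 := ⟨le_refl _, by exact_mod_cast hn⟩
  intro divs
  induction divs with
  | nil => rfl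
  | cons t ts ih =>
    show (if pvPeelA orderA parentA t (PySem.Int.floordiv total t) nums0 0 then
            PySem.Int.floordiv total t - 1
          else pvGoA ts orderA parentA total nums0) = _
    have hApeel := pvPeelA_char T nums0 t (PySem.Int.floordiv total t) parentA hA4 hA5
      orderA ∅ nums0 0 hA1 (fun x hx => (hA2 x).1 hx) (fun x hx => absurd hx (Finset.notMem_empty x))
      (fun x _ => Finset.notMem_empty x) (fun x hx => Or.inr ((hA2 x).2 hx))
      (fun x hx c hc => Or.inr (hA3 x hx c hc))
      (Or.inl ((hA2 0).2 h0node))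
      (fun v hv => by rw [pvSsum_empty, add_zero])
      (by rw [pvPCnt_empty]; rfl)
    have hBpeel := pvPeelB_char T nums0 t parentB hB4
      orderB ∅ nums0 0 hB1 (fun x hx => (hB2 x).1 hx)
      (fun x hx => absurd hx (Finset.notMem_empty x))
      (fun x _ => Finset.notMem_empty x) (fun x hx _ => Or.inr ((hB2 x).2 hx))
      (fun x hx c hc => Or.inr (hB3 x hx c hc))
      (fun v hv => by rw [pvSsum_empty, add_zero])
      (by rw [pvPCnt_empty]; rfl)
    have hiff : (pvPeelA orderA parentA t (PySem.Int.floordiv total t) nums0 0 = true) ↔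
        ((pvPeelB orderB parentB t nums0 0).1 0 = t ∧
         (pvPeelB orderB parentB t nums0 0).2 + 1 = PySem.Int.floordiv total t) := by
      rw [hApeel, hBpeel.1, hBpeel.2]
      rw [decide_eq_true_iff]
      constructor
      · rintro ⟨h1, h2⟩
        refine ⟨h1, ?_⟩
        rw [pvCnt_split edges nums0 t hn, if_pos h1] at h2
        omega
      · rintro ⟨h1, h2⟩
        refine ⟨h1, ?_⟩
        rw [pvCnt_split edges nums0 t hn, if_pos h1]
        omega
    show _ = (if (pvPeelB orderB parentB t nums0 0).1 0 = t ∧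
          (pvPeelB orderB parentB t nums0 0).2 + 1 = PySem.Int.floordiv total t then
          PySem.Int.floordiv total t - 1
        else pvGoB ts orderB parentB total nums0)
    by_cases hc : pvPeelA orderA parentA t (PySem.Int.floordiv total t) nums0 0 = true
    · rw [if_pos hc, if_pos (hiff.1 hc)]
    · rw [if_neg (by simpa using hc), if_neg (fun hh => hc (hiff.2 hh)), ih]

lemma pvDfsPush_char (u : Int) : ∀ (adjU : List Int), u ∉ adjU →
    ∀ (parent : Int → Int) (stack : List Int),
    pvDfsPush adjU u parent stack =
      ((fun x => if x ∈ adjU.filter (· ≠ parent u) then u else parent x),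
       (adjU.filter (· ≠ parent u)).reverse ++ stack) := by
  intro adjU
  induction adjU with
  | nil =>
    intro _ parent stack
    simp [pvDfsPush]
  | cons w ws ih =>
    intro hu parent stack
    have hwu : w ≠ u := fun hh => hu (hh ▸ List.mem_cons_self)
    have hu' : u ∉ ws := fun hh => hu (List.mem_cons_of_mem _ hh)
    show (ws.foldl _ (if w = parent u then (parent, stack)
        else (Function.update parent w u, w :: stack))) = _
    by_cases hw : w = parent u
    · rw [if_pos hw]
      have := ih hu' parent stack
      unfold pvDfsPush at this
      rw [this]
      have hfil : (w :: ws).filter (· ≠ parent u) = ws.filter (· ≠ parent u) := by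
        rw [List.filter_cons]
        simp [hw]
      rw [hfil]
    · rw [if_neg hw]
      have hpu : Function.update parent w u u = parent u := by
        rw [Function.update_apply, if_neg (Ne.symm hwu)]
      have := ih hu' (Function.update parent w u) (w :: stack)
      unfold pvDfsPush at this
      rw [this]
      have hfil : (w :: ws).filter (· ≠ parent u) = w :: ws.filter (· ≠ parent u) := by
        rw [List.filter_cons]
        simp [hw]
      rw [hpu, hfil, Prod.mk.injEq]
      constructor
      · funext x
        by_cases hx : x ∈ ws.filter (· ≠ parent u)
        · rw [if_pos hx, if_pos (List.mem_cons_of_mem _ hx)]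
        · by_cases hxw : x = w
          · subst hxw
            rw [if_neg hx, if_pos List.mem_cons_self, Function.update_self]
          · rw [if_neg hx, if_neg (by
              rw [List.mem_cons]
              rintro (h | h)
              · exact hxw h
              · exact hx h), Function.update_apply, if_neg hxw]
      · simp

lemma pvLen_le_n {n : Nat} (l : List Int) (hl : l.Nodup) (hn : ∀ x ∈ l, pvNode n x) :
    l.length ≤ n := by
  classical
  have h1 : l.toFinset ⊆ pvAllNodes n := by
    intro x hx
    exact pvMem_allNodes.2 (hn x (List.mem_toFinset.1 hx))
  have h2 := Finset.card_le_card h1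
  rw [List.toFinset_card_of_nodup hl] at h2
  have h3 : (pvAllNodes n).card = n := by
    unfold pvAllNodes
    rw [Int.card_Icc]
    omega
  omega

lemma pvAll_in_order {n : Nat} {edges : List (List Int)} (T : pvTree n edges)
    (order : List Int) (h0 : (0:Int) ∈ order)
    (hdisc : ∀ x, pvNode n x → x ≠ 0 → pvC n edges x ∈ order → x ∈ order) :
    ∀ x, pvNode n x → x ∈ order := by
  have : ∀ (k : Nat) (x : Int), pvNode n x → pvLvl n edges x ≤ k → x ∈ order := by
    intro k
    induction k with
    | zero =>
      intro x hx hlvl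
      have : x = 0 := (pvLvl_eq_zero_iff (pvNode_ex T hx)).1 (Nat.le_zero.1 hlvl)
      exact this ▸ h0
    | succ k ih =>
      intro x hx hlvl
      by_cases hx0 : x = 0
      · exact hx0 ▸ h0
      · have hc := pvC_rt' T hx hx0
        have hcnode := pvC_node T hx hx0
        have : pvLvl n edges (pvC n edges x) ≤ k := by
          have := hc.2
          omega
        exact hdisc x hx hx0 (ih _ hcnode this)
  intro x hx
  exact this (pvLvl n edges x) x hx (le_refl _)

-- invariant bundle for one BFS sweep
def pvSw (n : Nat) (edges : List (List Int)) (cur base : List Int)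
    (parent0 : Int → Int) (s : (Int → Bool) × (Int → Int) × List Int) : Prop :=
  (∀ x, s.1 x = true ↔ (x ∈ base ∨ x ∈ s.2.2)) ∧
  s.2.2.Nodup ∧
  (∀ w ∈ s.2.2, pvC n edges w ∈ cur ∧ pvNode n w ∧ w ≠ 0 ∧ w ∉ base) ∧
  (∀ x ∈ s.2.2, s.2.1 x = pvC n edges x) ∧
  (∀ x, x ∉ s.2.2 → s.2.1 x = parent0 x)

lemma pvIdx_lt {l : List Int} {a : Int} (h : a ∈ l) : l.idxOf a < l.length :=
  List.idxOf_lt_length_of_mem h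

lemma pvDfsDone {n : Nat} {edges : List (List Int)} (T : pvTree n edges)
    (parent : Int → Int) (order : List Int)
    (hnode : ∀ x ∈ order, pvNode n x)
    (h0 : (0:Int) ∈ order)
    (hpar : ∀ x ∈ order, x ≠ 0 → parent x = pvC n edges x)
    (hpar0 : parent 0 = 0)
    (hCO : ∀ x ∈ order, x ≠ 0 → pvC n edges x ∈ order ∧
      order.idxOf (pvC n edges x) < order.idxOf x)
    (hdisc : ∀ x, pvNode n x → x ≠ 0 → pvC n edges x ∈ order → x ∈ order) :
    (∀ x, x ∈ order ↔ pvNode n x) ∧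
    (∀ x, pvNode n x → x ≠ 0 → parent x = pvC n edges x) ∧
    parent 0 = 0 ∧
    (∀ x, pvNode n x → x ≠ 0 →
      order.idxOf (pvC n edges x) < order.idxOf x) := by
  have hall := pvAll_in_order T order h0 hdisc
  refine ⟨fun x => ⟨hnode x, hall x⟩, ?_, hpar0, ?_⟩
  · intro x hx hx0
    exact hpar x (hall x hx) hx0
  · intro x hx hx0
    exact (hCO x (hall x hx) hx0).2

lemma pvDfsRun {n : Nat} {edges : List (List Int)} (T : pvTree n edges) :
    ∀ (fuel : Nat) (stack : List Int) (parent : Int → Int) (order : List Int),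
      (order ++ stack).Nodup →
      (∀ x ∈ order ++ stack, pvNode n x) →
      (0:Int) ∈ order ++ stack →
      (∀ x ∈ order ++ stack, x ≠ 0 → parent x = pvC n edges x) →
      parent 0 = 0 →
      (∀ x ∈ order, x ≠ 0 → pvC n edges x ∈ order ∧
        order.idxOf (pvC n edges x) < order.idxOf x) →
      (∀ x ∈ stack, x ≠ 0 → pvC n edges x ∈ order) →
      (∀ x, pvNode n x → x ≠ 0 → pvC n edges x ∈ order → x ∈ order ++ stack) →
      n ≤ fuel + order.length →
      (∀ x, x ∈ (pvDfsLoop fuel stack (pvAdj edges) parent order).2 ↔ pvNode n x) ∧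
      (∀ x, pvNode n x → x ≠ 0 →
        (pvDfsLoop fuel stack (pvAdj edges) parent order).1 x = pvC n edges x) ∧
      (pvDfsLoop fuel stack (pvAdj edges) parent order).1 0 = 0 ∧
      (∀ x, pvNode n x → x ≠ 0 →
        (pvDfsLoop fuel stack (pvAdj edges) parent order).2.idxOf (pvC n edges x) <
        (pvDfsLoop fuel stack (pvAdj edges) parent order).2.idxOf x) ∧
      (pvDfsLoop fuel stack (pvAdj edges) parent order).2.Nodup := by
  intro fuel
  induction fuel with
  | zero =>
    intro stack parent order hN hnodes h0 hpar hpar0 hCO hCS hdisc hfuel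
    -- fuel exhausted: the nodup length bound forces stack = []
    have hlen : (order ++ stack).length ≤ n := pvLen_le_n _ hN hnodes
    rw [List.length_append] at hlen
    have hstack : stack = [] := by
      have : stack.length = 0 := by omega
      exact List.length_eq_zero_iff.1 this
    subst hstack
    simp only [List.append_nil] at hN hnodes h0 hpar hdisc
    have hdone := pvDfsDone T parent order hnodes h0 hpar hpar0 hCO hdisc
    exact ⟨hdone.1, hdone.2.1, hdone.2.2.1, fun x hx hx0 => hdone.2.2.2 x hx hx0, by
      simpa using hN⟩
  | succ f ih =>
    intro stack parent order hN hnodes h0 hpar hpar0 hCO hCS hdisc hfuel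
    rcases stack with _ | ⟨u, rest⟩
    · simp only [List.append_nil] at hN hnodes h0 hpar hdisc
      have hdone := pvDfsDone T parent order hnodes h0 hpar hpar0 hCO hdisc
      exact ⟨hdone.1, hdone.2.1, hdone.2.2.1, fun x hx hx0 => hdone.2.2.2 x hx hx0, by
        simpa using hN⟩
    · -- pop u
      have hunode : pvNode n u := hnodes u (by simp)
      have huo : u ∉ order := by
        have hd := (List.nodup_append.1 hN).2.2
        intro hu
        exact hd u hu u (by simp) rfl
      have hurest : u ∉ rest := by
        have := ((List.nodup_append.1 hN).2.1)
        exact (List.nodup_cons.1 this).1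
      have hu_nbrs : u ∉ pvNbrs edges u := by
        intro hmem
        exact pvAdjB_irrefl T u ((pvMem_nbrs edges u u).1 hmem)
      have hadj : pvAdj edges u = pvNbrs edges u := pvAdj_eq_nbrs edges u
      have hpr : pvDfsPush (pvAdj edges u) u parent rest =
          ((fun x => if x ∈ (pvNbrs edges u).filter (· ≠ parent u) then u else parent x),
           ((pvNbrs edges u).filter (· ≠ parent u)).reverse ++ rest) := by
        rw [hadj]
        exact pvDfsPush_char u (pvNbrs edges u) hu_nbrs parent rest
      set pushed := (pvNbrs edges u).filter (· ≠ parent u) with hpushed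
      have hunf : pvDfsLoop (f+1) (u :: rest) (pvAdj edges) parent order =
          pvDfsLoop f (pushed.reverse ++ rest) (pvAdj edges)
            (fun x => if x ∈ pushed then u else parent x) (order ++ [u]) := by
        show pvDfsLoop f (pvDfsPush (pvAdj edges u) u parent rest).2 (pvAdj edges)
            (pvDfsPush (pvAdj edges u) u parent rest).1 (order ++ [u]) = _
        rw [hpr]
      rw [hunf]
      -- facts about pushed
      have hCw : ∀ w ∈ pushed, pvC n edges w = u ∧ pvNode n w ∧ w ≠ 0 := by
        intro w hw
        rcases List.mem_filter.1 hw with ⟨hwn, hwp⟩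
        have hadjuw : pvAdjB edges u w = true := (pvMem_nbrs edges u w).1 hwn
        have hwp' : w ≠ parent u := by simpa using hwp
        rcases pvEdge_cases T hadjuw with ⟨hne, hcase | hcase⟩
        · rcases pvMem_nonroots.1 hcase.2 with ⟨hwnode, hw0⟩
          exact ⟨hcase.1, hwnode, hw0⟩
        · exfalso
          rcases pvMem_nonroots.1 hcase.2 with ⟨hunode', hu0⟩
          have : parent u = pvC n edges u := hpar u (by simp) hu0
          exact hwp' (by rw [this, hcase.1])
      have hfresh : ∀ w ∈ pushed, w ∉ order ++ u :: rest := by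
        intro w hw hmem
        rcases hCw w hw with ⟨hc, hwnode, hw0⟩
        rcases List.mem_append.1 hmem with hmem | hmem
        · have := (hCO w hmem hw0).1
          rw [hc] at this
          exact huo this
        · rcases List.mem_cons.1 hmem with rfl | hmem
          · exact (pvC_ne T hwnode hw0) hc
          · have := hCS w (List.mem_cons_of_mem _ hmem) hw0
            rw [hc] at this
            exact huo this
      have hpushN : pushed.Nodup := List.Nodup.filter _ (pvNbrs_nodup T u)
      -- invariants for the recursive call
      have hN' : ((order ++ [u]) ++ (pushed.reverse ++ rest)).Nodup := by
        rw [List.nodup_append] at hN ⊢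
        obtain ⟨hOn, hSn, hOS⟩ := hN
        have hRn := (List.nodup_cons.1 hSn).2
        refine ⟨?_, ?_, ?_⟩
        · rw [List.nodup_append]
          refine ⟨hOn, List.nodup_singleton u, ?_⟩
          intro a ha b hb
          rcases List.mem_singleton.1 hb with rfl
          exact fun hh => huo (hh ▸ ha)
        · rw [List.nodup_append]
          refine ⟨List.nodup_reverse.2 hpushN, hRn, ?_⟩
          intro a ha b hb hab
          subst hab
          exact hfresh a (List.mem_reverse.1 ha) (by simp [hb])
        · intro a ha b hb hab
          subst hab
          rcases List.mem_append.1 ha with ha' | ha'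
          · rcases List.mem_append.1 hb with hb' | hb'
            · exact hfresh a (List.mem_reverse.1 hb') (List.mem_append_left _ ha')
            · exact hOS a ha' a (List.mem_cons_of_mem _ hb') rfl
          · rcases List.mem_singleton.1 ha' with rfl
            rcases List.mem_append.1 hb with hb' | hb'
            · exact hfresh a (List.mem_reverse.1 hb') (by simp)
            · exact hurest hb'
      have hmem_iff : ∀ x, x ∈ (order ++ [u]) ++ (pushed.reverse ++ rest) ↔
          (x ∈ order ++ u :: rest ∨ x ∈ pushed) := by
        intro x
        simp only [List.mem_append, List.mem_singleton, List.mem_reverse, List.mem_cons]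
        tauto
      have hnodes' : ∀ x ∈ (order ++ [u]) ++ (pushed.reverse ++ rest), pvNode n x := by
        intro x hx
        rcases (hmem_iff x).1 hx with h | h
        · exact hnodes x h
        · exact (hCw x h).2.1
      have h0' : (0:Int) ∈ (order ++ [u]) ++ (pushed.reverse ++ rest) := by
        rw [hmem_iff]
        exact Or.inl h0
      have hpar' : ∀ x ∈ (order ++ [u]) ++ (pushed.reverse ++ rest), x ≠ 0 →
          (if x ∈ pushed then u else parent x) = pvC n edges x := by
        intro x hx hx0
        by_cases hxp : x ∈ pushed
        · rw [if_pos hxp]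
          exact (hCw x hxp).1.symm
        · rw [if_neg hxp]
          rcases (hmem_iff x).1 hx with h | h
          · exact hpar x h hx0
          · exact absurd h hxp
      have hpar0' : (if (0:Int) ∈ pushed then u else parent 0) = 0 := by
        have : (0:Int) ∉ pushed := fun h => (hCw 0 h).2.2 rfl
        rw [if_neg this, hpar0]
      have hidx_keep : ∀ a ∈ order, (order ++ [u]).idxOf a = order.idxOf a := by
        intro a ha
        rw [List.idxOf_append, if_pos ha]
      have hidx_u : (order ++ [u]).idxOf u = order.length := by
        rw [List.idxOf_append, if_neg huo, List.idxOf_cons_self]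
        omega
      have hCO' : ∀ x ∈ order ++ [u], x ≠ 0 → pvC n edges x ∈ order ++ [u] ∧
          (order ++ [u]).idxOf (pvC n edges x) < (order ++ [u]).idxOf x := by
        intro x hx hx0
        rcases List.mem_append.1 hx with hx' | hx'
        · have := hCO x hx' hx0
          refine ⟨List.mem_append_left _ this.1, ?_⟩
          rw [hidx_keep _ this.1, hidx_keep _ hx']
          exact this.2
        · rcases List.mem_singleton.1 hx' with rfl
          have hcu : pvC n edges x ∈ order := hCS x (by simp) hx0
          refine ⟨List.mem_append_left _ hcu, ?_⟩
          rw [hidx_keep _ hcu, hidx_u]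
          exact pvIdx_lt hcu
      have hCS' : ∀ x ∈ pushed.reverse ++ rest, x ≠ 0 → pvC n edges x ∈ order ++ [u] := by
        intro x hx hx0
        rcases List.mem_append.1 hx with hx' | hx'
        · rw [(hCw x (List.mem_reverse.1 hx')).1]
          simp
        · exact List.mem_append_left _ (hCS x (List.mem_cons_of_mem _ hx') hx0)
      have hdisc' : ∀ x, pvNode n x → x ≠ 0 → pvC n edges x ∈ order ++ [u] →
          x ∈ (order ++ [u]) ++ (pushed.reverse ++ rest) := by
        intro x hx hx0 hc
        rw [hmem_iff]
        rcases List.mem_append.1 hc with hc' | hc'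
        · exact Or.inl (hdisc x hx hx0 hc')
        · rcases List.mem_singleton.1 hc' with hc''
          right
          have hadjux : pvAdjB edges u x = true := by
            have := pvC_adj T hx hx0
            rw [hc''] at this
            exact this
          have hxnbrs : x ∈ pvNbrs edges u := (pvMem_nbrs edges u x).2 hadjux
          have hxpu : x ≠ parent u := by
            by_cases hu0 : u = 0
            · subst hu0
              rw [hpar0]
              exact hx0
            · intro hh
              have hpu : parent u = pvC n edges u := hpar u (by simp) hu0
              have h1 : pvLvl n edges (pvC n edges x) < pvLvl n edges x :=
                pvC_lvl_lt T hx hx0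
              have h2 : pvLvl n edges (pvC n edges u) < pvLvl n edges u :=
                pvC_lvl_lt T hunode hu0
              rw [hc''] at h1
              rw [← hpu, ← hh] at h2
              omega
          exact List.mem_filter.2 ⟨hxnbrs, by simpa using hxpu⟩
      have hfuel' : n ≤ f + (order ++ [u]).length := by
        rw [List.length_append]
        simp only [List.length_singleton]
        omega
      exact ih (pushed.reverse ++ rest) _ (order ++ [u]) hN' hnodes' h0' hpar' hpar0'
        hCO' hCS' hdisc' hfuel'

lemma pvBfsInner {n : Nat} {edges : List (List Int)} (T : pvTree n edges)
    (cur base : List Int) (parent0 : Int → Int) (u : Int) (hu : u ∈ cur)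
    (hupar : u ≠ 0 → pvC n edges u ∈ base) :
    ∀ (ws : List Int), (∀ w ∈ ws, pvAdjB edges u w = true) →
    ∀ (s : (Int → Bool) × (Int → Int) × List Int), pvSw n edges cur base parent0 s →
    (ws.foldl (fun s w =>
      if s.1 w then s
      else (Function.update s.1 w true, Function.update s.2.1 w u, s.2.2 ++ [w])) s =
      let s' := ws.foldl (fun s w =>
        if s.1 w then s
        else (Function.update s.1 w true, Function.update s.2.1 w u, s.2.2 ++ [w])) s
      s') ∧
    pvSw n edges cur base parent0
      (ws.foldl (fun s w =>
        if s.1 w then s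
        else (Function.update s.1 w true, Function.update s.2.1 w u, s.2.2 ++ [w])) s) ∧
    (∀ w ∈ ws, (ws.foldl (fun s w =>
        if s.1 w then s
        else (Function.update s.1 w true, Function.update s.2.1 w u, s.2.2 ++ [w])) s).1 w = true) ∧
    (∀ x, s.1 x = true → (ws.foldl (fun s w =>
        if s.1 w then s
        else (Function.update s.1 w true, Function.update s.2.1 w u, s.2.2 ++ [w])) s).1 x = true) ∧
    (∀ x ∈ s.2.2, x ∈ (ws.foldl (fun s w =>
        if s.1 w then s
        else (Function.update s.1 w true, Function.update s.2.1 w u, s.2.2 ++ [w])) s).2.2) := by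
  intro ws
  induction ws with
  | nil =>
    intro _ s hs
    exact ⟨rfl, hs, fun w hw => absurd hw (List.not_mem_nil), fun x hx => hx, fun x hx => hx⟩
  | cons w ws ih =>
    intro hadj s hs
    obtain ⟨hseen, hnodup, hprops, hpar_in, hpar_out⟩ := hs
    have hadj' : ∀ w' ∈ ws, pvAdjB edges u w' = true :=
      fun w' hw' => hadj w' (List.mem_cons_of_mem _ hw')
    by_cases hsw : s.1 w = true
    · -- already seen: skip
      have hstep : (w :: ws).foldl (fun s w =>
          if s.1 w then s
          else (Function.update s.1 w true, Function.update s.2.1 w u, s.2.2 ++ [w])) s =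
          ws.foldl (fun s w =>
          if s.1 w then s
          else (Function.update s.1 w true, Function.update s.2.1 w u, s.2.2 ++ [w])) s := by
        rw [List.foldl_cons, if_pos hsw]
      rw [hstep]
      have := ih hadj' s ⟨hseen, hnodup, hprops, hpar_in, hpar_out⟩
      refine ⟨rfl, this.2.1, ?_, this.2.2.2.1, this.2.2.2.2⟩
      intro w' hw'
      rcases List.mem_cons.1 hw' with rfl | hw''
      · exact this.2.2.2.1 w' hsw
      · exact this.2.2.1 w' hw''
    · -- new discovery
      have hwu : pvAdjB edges u w = true := hadj w List.mem_cons_self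
      have hchild : pvC n edges w = u ∧ w ∈ pvNonroots n := by
        rcases pvEdge_cases T hwu with ⟨hne, hcase | hcase⟩
        · exact hcase
        · exfalso
          rcases pvMem_nonroots.1 hcase.2 with ⟨hunode, hu0⟩
          have : pvC n edges u ∈ base := hupar hu0
          have : s.1 w = true := (hseen w).2 (Or.inl (hcase.1 ▸ this))
          exact hsw this
      rcases pvMem_nonroots.1 hchild.2 with ⟨hwnode, hw0⟩
      have hwbase : w ∉ base := fun hh => hsw ((hseen w).2 (Or.inl hh))
      have hwnxt : w ∉ s.2.2 := fun hh => hsw ((hseen w).2 (Or.inr hh))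
      have hstep : (w :: ws).foldl (fun s w =>
          if s.1 w then s
          else (Function.update s.1 w true, Function.update s.2.1 w u, s.2.2 ++ [w])) s =
          ws.foldl (fun s w =>
          if s.1 w then s
          else (Function.update s.1 w true, Function.update s.2.1 w u, s.2.2 ++ [w]))
          (Function.update s.1 w true, Function.update s.2.1 w u, s.2.2 ++ [w]) := by
        rw [List.foldl_cons, if_neg hsw]
      rw [hstep]
      have hs' : pvSw n edges cur base parent0
          (Function.update s.1 w true, Function.update s.2.1 w u, s.2.2 ++ [w]) := by
        refine ⟨?_, ?_, ?_, ?_, ?_⟩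
        · intro x
          show Function.update s.1 w true x = true ↔ _
          rw [Function.update_apply]
          by_cases hxw : x = w
          · subst hxw
            simp [hwbase]
          · rw [if_neg hxw, hseen x]
            simp only [List.mem_append, List.mem_singleton]
            constructor
            · rintro (h | h)
              · exact Or.inl h
              · exact Or.inr (Or.inl h)
            · rintro (h | h | h)
              · exact Or.inl h
              · exact Or.inr h
              · exact absurd h hxw
        · show (s.2.2 ++ [w]).Nodup
          rw [List.nodup_append]
          refine ⟨hnodup, List.nodup_singleton w, ?_⟩
          intro a ha b hb
          rcases List.mem_singleton.1 hb with rfl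
          exact fun hh => hwnxt (hh ▸ ha)
        · intro w' hw'
          rcases List.mem_append.1 hw' with h | h
          · exact hprops w' h
          · rcases List.mem_singleton.1 h with rfl
            exact ⟨hchild.1 ▸ hu, hwnode, hw0, hwbase⟩
        · intro x hx
          show Function.update s.2.1 w u x = _
          rcases List.mem_append.1 hx with h | h
          · rw [Function.update_apply, if_neg (fun hh => hwnxt (by rw [← hh]; exact h))]
            exact hpar_in x h
          · rcases List.mem_singleton.1 h with rfl
            rw [Function.update_self]
            exact hchild.1.symm
        · intro x hx
          show Function.update s.2.1 w u x = _
          have hxw : x ≠ w := fun hh => hx (hh ▸ List.mem_append_right _ (by simp))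
          rw [Function.update_apply, if_neg hxw]
          exact hpar_out x (fun hh => hx (List.mem_append_left _ hh))
      have := ih hadj' _ hs'
      refine ⟨rfl, this.2.1, ?_, ?_, ?_⟩
      · intro w' hw'
        rcases List.mem_cons.1 hw' with rfl | hw''
        · apply this.2.2.2.1
          show Function.update s.1 w' true w' = true
          rw [Function.update_self]
        · exact this.2.2.1 w' hw''
      · intro x hx
        apply this.2.2.2.1
        show Function.update s.1 w true x = true
        rw [Function.update_apply]
        split_ifs
        · rfl
        · exact hx
      · intro x hx
        apply this.2.2.2.2
        exact List.mem_append_left _ hx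

lemma pvBfsSweep {n : Nat} {edges : List (List Int)} (T : pvTree n edges)
    (cur base : List Int) (parent0 : Int → Int)
    (hcurpar : ∀ u ∈ cur, u ≠ 0 → pvC n edges u ∈ base) :
    ∀ (cs : List Int), cs ⊆ cur →
    ∀ (s : (Int → Bool) × (Int → Int) × List Int), pvSw n edges cur base parent0 s →
    (∀ x, pvNode n x → x ≠ 0 → pvC n edges x ∈ cur → (pvC n edges x ∈ cs ∨ s.1 x = true)) →
    pvSw n edges cur base parent0
      (cs.foldl (fun s u => (pvAdj edges u).foldl (fun s w =>
        if s.1 w then s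
        else (Function.update s.1 w true, Function.update s.2.1 w u, s.2.2 ++ [w])) s) s) ∧
    (∀ x, pvNode n x → x ≠ 0 → pvC n edges x ∈ cur →
      (cs.foldl (fun s u => (pvAdj edges u).foldl (fun s w =>
        if s.1 w then s
        else (Function.update s.1 w true, Function.update s.2.1 w u, s.2.2 ++ [w])) s) s).1 x = true) ∧
    (∀ x ∈ s.2.2, x ∈ (cs.foldl (fun s u => (pvAdj edges u).foldl (fun s w =>
        if s.1 w then s
        else (Function.update s.1 w true, Function.update s.2.1 w u, s.2.2 ++ [w])) s) s).2.2) := by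
  intro cs
  induction cs with
  | nil =>
    intro _ s hs hcomp
    refine ⟨hs, ?_, fun x hx => hx⟩
    intro x hx hx0 hc
    rcases hcomp x hx hx0 hc with h | h
    · exact absurd h (List.not_mem_nil)
    · exact h
  | cons u cs ih =>
    intro hsub s hs hcomp
    have hu : u ∈ cur := hsub List.mem_cons_self
    have hinner := pvBfsInner T cur base parent0 u hu
      (fun hu0 => hcurpar u hu hu0) (pvAdj edges u)
      (fun w hw => (pvMem_nbrs edges u w).1 (by rwa [pvAdj_eq_nbrs] at hw)) s hs
    rw [List.foldl_cons]
    have := ih (fun x hx => hsub (List.mem_cons_of_mem _ hx)) _ hinner.2.1 ?_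
    · refine ⟨this.1, this.2.1, ?_⟩
      intro x hx
      exact this.2.2 x (hinner.2.2.2.2 x hx)
    · intro x hx hx0 hc
      rcases hcomp x hx hx0 hc with h | h
      · rcases List.mem_cons.1 h with hcu | h'
        · right
          apply hinner.2.2.1
          rw [pvAdj_eq_nbrs]
          apply (pvMem_nbrs edges u x).2
          have := pvC_adj T hx hx0
          rwa [hcu] at this
        · exact Or.inl h'
      · exact Or.inr (hinner.2.2.2.1 x h)

lemma pvBfsRun {n : Nat} {edges : List (List Int)} (T : pvTree n edges) :
    ∀ (fuel : Nat) (cur : List Int) (seen : Int → Bool) (parent : Int → Int) (done : List Int),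
      (done ++ cur).Nodup →
      (∀ x ∈ done ++ cur, pvNode n x) →
      (∀ x, seen x = true ↔ x ∈ done ++ cur) →
      (∀ x ∈ done ++ cur, x ≠ 0 → parent x = pvC n edges x) →
      (∀ x ∈ cur, x ≠ 0 → pvC n edges x ∈ done) →
      (∀ x ∈ done, x ≠ 0 → pvC n edges x ∈ done) →
      (∀ x, pvNode n x → x ≠ 0 → pvC n edges x ∈ done → x ∈ done ++ cur) →
      ((0:Int) ∈ done ++ cur) →
      n ≤ fuel + done.length →
      (∀ x, x ∈ (pvBfsLoop fuel (pvAdj edges) cur seen parent).2.flatten ↔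
        (pvNode n x ∧ x ∉ done)) ∧
      (pvBfsLoop fuel (pvAdj edges) cur seen parent).2.flatten.Nodup ∧
      (∀ x, pvNode n x → x ≠ 0 →
        (pvBfsLoop fuel (pvAdj edges) cur seen parent).1 x = pvC n edges x) ∧
      (∀ x ∈ (pvBfsLoop fuel (pvAdj edges) cur seen parent).2.flatten, x ≠ 0 →
        pvC n edges x ∈ done ∨
        (pvC n edges x ∈ (pvBfsLoop fuel (pvAdj edges) cur seen parent).2.flatten ∧
         (pvBfsLoop fuel (pvAdj edges) cur seen parent).2.flatten.idxOf x <
         (pvBfsLoop fuel (pvAdj edges) cur seen parent).2.flatten.idxOf (pvC n edges x))) := by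
  intro fuel
  induction fuel with
  | zero =>
    intro cur seen parent done hN hnodes hseen hpar hCS hDC hdisc h0 hfuel
    have hlen : (done ++ cur).length ≤ n := pvLen_le_n _ hN hnodes
    rw [List.length_append] at hlen
    have hcur : cur = [] := by
      have : cur.length = 0 := by omega
      exact List.length_eq_zero_iff.1 this
    subst hcur
    simp only [List.append_nil] at hN hnodes hpar hdisc h0
    have hall := pvAll_in_order T done h0 hdisc
    have hunf0 : pvBfsLoop 0 (pvAdj edges) [] seen parent = (parent, []) := rfl
    rw [hunf0]
    refine ⟨?_, by simp, ?_, by simp⟩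
    · intro x
      simp only [List.flatten_nil, List.not_mem_nil, false_iff]
      rintro ⟨hx, hnd⟩
      exact hnd (hall x hx)
    · intro x hx hx0
      exact hpar x (hall x hx) hx0
  | succ f ih =>
    intro cur seen parent done hN hnodes hseen hpar hCS hDC hdisc h0 hfuel
    by_cases hcur : cur = []
    · subst hcur
      simp only [List.append_nil] at hN hnodes hpar hdisc h0
      have hall := pvAll_in_order T done h0 hdisc
      have hunf : pvBfsLoop (f+1) (pvAdj edges) [] seen parent = (parent, []) := by
        simp [pvBfsLoop]
      rw [hunf]
      refine ⟨?_, by simp, ?_, by simp⟩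
      · intro x
        simp only [List.flatten_nil, List.not_mem_nil, false_iff]
        rintro ⟨hx, hnd⟩
        exact hnd (hall x hx)
      · intro x hx hx0
        exact hpar x (hall x hx) hx0
    · -- one sweep
      obtain ⟨c0, cs0, hcur_eq⟩ : ∃ c cs, cur = c :: cs := by
        rcases cur with _ | ⟨c, cs⟩
        · exact absurd rfl hcur
        · exact ⟨c, cs, rfl⟩
      have hsw0 : pvSw n edges cur (done ++ cur) parent (seen, parent, []) := by
        refine ⟨?_, by simp, by simp, by simp, fun x _ => rfl⟩
        intro x
        simp only [List.not_mem_nil, or_false]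
        exact hseen x
      have hsweep := pvBfsSweep T cur (done ++ cur) parent
        (fun u hu hu0 => List.mem_append_left _ (hCS u hu hu0))
        cur (fun x hx => hx) (seen, parent, []) hsw0
        (fun x hx hx0 hc => Or.inl hc)
      set s := cur.foldl (fun s u => (pvAdj edges u).foldl (fun s w =>
        if s.1 w then s
        else (Function.update s.1 w true, Function.update s.2.1 w u, s.2.2 ++ [w])) s)
        (seen, parent, ([] : List Int)) with hs_def
      obtain ⟨⟨hseen', hnxtN, hprops, hparin, hparout⟩, hcomp, _⟩ := hsweep
      set nxt := s.2.2 with hnxt_def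
      have hstepeq : pvBfsStep (pvAdj edges) cur seen parent = s := rfl
      have hunf : pvBfsLoop (f+1) (pvAdj edges) cur seen parent =
          ((pvBfsLoop f (pvAdj edges) nxt s.1 s.2.1).1,
           (pvBfsLoop f (pvAdj edges) nxt s.1 s.2.1).2 ++ [cur]) := by
        subst hcur_eq
        rfl
      rw [hunf]
      -- invariants for the recursive call with done' = done ++ cur
      have hcurN : cur.Nodup := (List.nodup_append.1 hN).2.1
      have hcur_nodes : ∀ x ∈ cur, pvNode n x :=
        fun x hx => hnodes x (List.mem_append_right _ hx)
      have hN' : ((done ++ cur) ++ nxt).Nodup := by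
        rw [List.nodup_append]
        refine ⟨hN, hnxtN, ?_⟩
        intro a ha b hb hab
        subst hab
        exact (hprops a hb).2.2.2 ha
      have hnodes' : ∀ x ∈ (done ++ cur) ++ nxt, pvNode n x := by
        intro x hx
        rcases List.mem_append.1 hx with h | h
        · exact hnodes x h
        · exact (hprops x h).2.1
      have hseen'' : ∀ x, s.1 x = true ↔ x ∈ (done ++ cur) ++ nxt := by
        intro x
        rw [hseen' x]
        simp [List.mem_append, or_assoc]
      have hpar'' : ∀ x ∈ (done ++ cur) ++ nxt, x ≠ 0 → s.2.1 x = pvC n edges x := by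
        intro x hx hx0
        rcases List.mem_append.1 hx with h | h
        · have hxnin : x ∉ nxt := fun hh => (hprops x hh).2.2.2 h
          rw [hparout x hxnin]
          exact hpar x h hx0
        · exact hparin x h
      have hCS'' : ∀ x ∈ nxt, x ≠ 0 → pvC n edges x ∈ done ++ cur :=
        fun x hx _ => List.mem_append_right _ (hprops x hx).1
      have hDC'' : ∀ x ∈ done ++ cur, x ≠ 0 → pvC n edges x ∈ done ++ cur := by
        intro x hx hx0
        rcases List.mem_append.1 hx with h | h
        · exact List.mem_append_left _ (hDC x h hx0)
        · exact List.mem_append_left _ (hCS x h hx0)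
      have hdisc'' : ∀ x, pvNode n x → x ≠ 0 → pvC n edges x ∈ done ++ cur →
          x ∈ (done ++ cur) ++ nxt := by
        intro x hx hx0 hc
        rcases List.mem_append.1 hc with h | h
        · exact List.mem_append_left _ (hdisc x hx hx0 h)
        · have := hcomp x hx hx0 h
          rw [hseen' x] at this
          rcases this with h' | h'
          · exact List.mem_append_left _ h'
          · exact List.mem_append_right _ h'
      have h0'' : (0:Int) ∈ (done ++ cur) ++ nxt := List.mem_append_left _ h0
      have hfuel'' : n ≤ f + (done ++ cur).length := by
        rw [List.length_append]
        have : 1 ≤ cur.length := by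
          rcases cur with _ | ⟨c, cs⟩
          · exact absurd rfl hcur
          · simp
        omega
      have hrec := ih nxt s.1 s.2.1 (done ++ cur) hN' hnodes' hseen'' hpar'' hCS''
        hDC'' hdisc'' h0'' hfuel''
      obtain ⟨hK1, hK2, hK3, hK4⟩ := hrec
      have hflat : ((pvBfsLoop f (pvAdj edges) nxt s.1 s.2.1).2 ++ [cur]).flatten =
          (pvBfsLoop f (pvAdj edges) nxt s.1 s.2.1).2.flatten ++ cur := by
        rw [List.flatten_append]
        simp
      set RF := (pvBfsLoop f (pvAdj edges) nxt s.1 s.2.1).2.flatten with hRF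
      show (∀ x, x ∈ ((pvBfsLoop f (pvAdj edges) nxt s.1 s.2.1).2 ++ [cur]).flatten ↔ _) ∧ _
      rw [hflat]
      have hRFdis : ∀ x ∈ RF, x ∉ done ++ cur := fun x hx => ((hK1 x).1 hx).2
      have hcur_nin_RF : ∀ x ∈ cur, x ∉ RF :=
        fun x hx hh => hRFdis x hh (List.mem_append_right _ hx)
      refine ⟨?_, ?_, hK3, ?_⟩
      · intro x
        rw [List.mem_append]
        constructor
        · rintro (h | h)
          · have := (hK1 x).1 h
            refine ⟨this.1, fun hh => this.2 (List.mem_append_left _ hh)⟩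
          · refine ⟨hcur_nodes x h, fun hh => ?_⟩
            have := (List.nodup_append.1 hN).2.2
            exact this x hh x h rfl
        · rintro ⟨hx, hnd⟩
          by_cases hxc : x ∈ cur
          · exact Or.inr hxc
          · left
            apply (hK1 x).2
            refine ⟨hx, fun hh => ?_⟩
            rcases List.mem_append.1 hh with h | h
            · exact hnd h
            · exact hxc h
      · rw [List.nodup_append]
        exact ⟨hK2, hcurN, fun a ha b hb hab => hcur_nin_RF b hb (hab ▸ ha)⟩
      · -- children-before positions
        intro x hx hx0
        rcases List.mem_append.1 hx with hxRF | hxcur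
        · rcases hK4 x hxRF hx0 with h | ⟨hcin, hidx⟩
          · rcases List.mem_append.1 h with h' | h'
            · exact Or.inl h'
            · -- parent in cur: x strictly before it
              right
              refine ⟨List.mem_append_right _ h', ?_⟩
              have hxi : (RF ++ cur).idxOf x = RF.idxOf x := by
                rw [List.idxOf_append, if_pos hxRF]
              have hpnin : pvC n edges x ∉ RF :=
                fun hh => hRFdis _ hh (List.mem_append_right _ h')
              have hpi : (RF ++ cur).idxOf (pvC n edges x) =
                  cur.idxOf (pvC n edges x) + RF.length := by
                rw [List.idxOf_append, if_neg hpnin]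
              rw [hxi, hpi]
              have := pvIdx_lt hxRF
              omega
          · right
            refine ⟨List.mem_append_left _ hcin, ?_⟩
            rw [List.idxOf_append, if_pos hxRF, List.idxOf_append, if_pos hcin]
            exact hidx
        · exact Or.inl (hCS x hxcur hx0)

lemma pvIdxOf_reverse {l : List Int} (hl : l.Nodup) {a : Int} (ha : a ∈ l) :
    l.reverse.idxOf a = l.length - 1 - l.idxOf a := by
  induction l with
  | nil => exact absurd ha (List.not_mem_nil)
  | cons x xs ih =>
    rw [List.reverse_cons]
    by_cases hax : a = x
    · subst hax
      have hnin : a ∉ xs := (List.nodup_cons.1 hl).1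
      have hnin' : a ∉ xs.reverse := fun h => hnin (List.mem_reverse.1 h)
      rw [List.idxOf_append, if_neg hnin', List.idxOf_cons_self, List.idxOf_cons_self]
      simp
    · have haxs : a ∈ xs := by
        rcases List.mem_cons.1 ha with h | h
        · exact absurd h hax
        · exact h
      have hrev : a ∈ xs.reverse := List.mem_reverse.2 haxs
      rw [List.idxOf_append, if_pos hrev, ih (List.nodup_cons.1 hl).2 haxs,
        List.idxOf_cons_ne _ (by simpa using Ne.symm hax)]
      have := pvIdx_lt haxs
      simp only [List.length_cons]
      omega

lemma pvIdxOf_reverse_lt {l : List Int} (hl : l.Nodup) {a b : Int} (ha : a ∈ l) (hb : b ∈ l)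
    (h : l.idxOf a < l.idxOf b) : l.reverse.idxOf b < l.reverse.idxOf a := by
  rw [pvIdxOf_reverse hl ha, pvIdxOf_reverse hl hb]
  have h1 := pvIdx_lt ha
  have h2 := pvIdx_lt hb
  omega

theorem pvMain (nums : List Int) (edges : List (List Int))
    (hpre : nums.length = 1 ∨ pvTree nums.length edges) :
    componentValue nums edges = componentValue_alt nums edges := by
  by_cases hn1 : nums.length = 1
  · unfold componentValue componentValue_alt
    rw [if_pos hn1, if_pos hn1]
  · have hT : pvTree nums.length edges := by
      rcases hpre with h | h
      · exact absurd h hn1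
      · exact h
    unfold componentValue componentValue_alt
    rw [if_neg hn1, if_neg hn1]
    set n := nums.length with hn
    have hn1' : 1 ≤ n := by have := hT.2.1; omega
    have h0node : pvNode n 0 := ⟨le_refl _, by exact_mod_cast hn1'⟩
    -- DFS facts
    have hdfs := pvDfsRun hT n [0] pvInitParent []
      (by simp)
      (by intro x hx; simp at hx; subst hx; exact h0node)
      (by simp)
      (by intro x hx hx0; simp at hx; exact absurd hx hx0)
      (by simp [pvInitParent])
      (by intro x hx; exact absurd hx (List.not_mem_nil))
      (by intro x hx hx0; simp at hx; exact absurd hx hx0)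
      (by intro x _ _ hc; exact absurd hc (List.not_mem_nil))
      (by simp)
    obtain ⟨hD1, hD2, hD3, hD4, hD5⟩ := hdfs
    set prA := pvDfsLoop n [0] (pvAdj edges) pvInitParent [] with hprA
    -- BFS facts
    have hbfs := pvBfsRun hT (n+1) [0] (fun v => v = 0) (fun _ => 0) []
      (by simp)
      (by intro x hx; simp at hx; subst hx; exact h0node)
      (by intro x; simp)
      (by intro x hx hx0; simp at hx; exact absurd hx hx0)
      (by intro x hx hx0; simp at hx; exact absurd hx hx0)
      (by intro x hx; exact absurd hx (List.not_mem_nil))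
      (by intro x _ _ hc; exact absurd hc (List.not_mem_nil))
      (by simp)
      (by simp)
    obtain ⟨hB1, hB2, hB3, hB4⟩ := hbfs
    set prB := pvBfsLoop (n+1) (pvAdj edges) [0] (fun v => v = 0) (fun _ => 0) with hprB
    apply pvGo_eq hT _ _ prA.2.reverse prA.1 prB.2.flatten prB.1
    · exact List.nodup_reverse.2 hD5
    · intro x
      rw [List.mem_reverse]
      exact hD1 x
    · intro x hx c hc
      rw [List.mem_reverse] at hx
      rcases pvMem_Cs.1 hc with ⟨⟨hcnode, hc0⟩, hcpar⟩
      have hcmem : c ∈ prA.2 := (hD1 c).2 hcnode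
      refine ⟨List.mem_reverse.2 hcmem, ?_⟩
      have := hD4 c hcnode hc0
      rw [hcpar] at this
      exact pvIdxOf_reverse_lt hD5 ((hD1 x).2 ((hD1 x).1 hx)) hcmem
        (by rw [← hcpar] at this ⊢; exact this)
    · exact fun x hx hx0 => hD2 x hx hx0
    · exact hD3
    · exact hB2
    · intro x
      rw [hB1 x]
      exact ⟨fun h => h.1, fun h => ⟨h, List.not_mem_nil⟩⟩
    · intro x hx c hc
      rcases pvMem_Cs.1 hc with ⟨⟨hcnode, hc0⟩, hcpar⟩
      have hcmem : c ∈ prB.2.flatten := (hB1 c).2 ⟨hcnode, List.not_mem_nil⟩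
      rcases hB4 c hcmem hc0 with h | ⟨h1, h2⟩
      · exact absurd h (List.not_mem_nil)
      · rw [hcpar] at h1 h2
        exact ⟨hcmem, h2⟩
    · exact hB3

-- ===== VERDICT (by name: the statement is the Claim_ definition above) =====
theorem componentValue_spec : Claim_equal_componentValue := by
  intro nums edges _ hpre
  unfold Spec_componentValue
  exact pvMain nums edges hpre
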